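-- pv_equiv track=rewrite | github.com/r-jelly/program-solving | baekjoon/1926.py | solution
-- ===== SOURCE A (Python) =====
-- from collections import deque
--
-- def bfs(painting, visited, point: tuple[int, int]):
--     y, x = point
--     queue = deque([point])
--     visited[y][x] = True
--     area = 0
--
--     while queue:
--         cur_y, cur_x = queue.popleft()
--         area += 1
--
--         for dy, dx in [(1, 0), (-1, 0), (0, 1), (0, -1)]:
--             next_y, next_x = cur_y+dy, cur_x+dx
--             if 0<=next_y<len(painting) and 0<=next_x<len(painting[0]):
--                 if visited[next_y][next_x] or painting[next_y][next_x] == 0: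
--                     continue
--
--                 visited[next_y][next_x] = True
--                 queue.append((next_y, next_x))
--     return area
--
-- def solution(painting, n, m):
--     visited = [[False]*m for _ in range(n)]
--     num_paint, max_area = 0, 0
--     for i in range(n):
--         for j in range(m):
--             if painting[i][j] == 1 and not visited[i][j]:
--                 area = bfs(painting, visited, (i, j))
--                 max_area = max(area, max_area)
--                 num_paint += 1
--
--     return num_paint, max_area
-- ===== SOURCE B (Python) =====
-- from collections import Counter
--
-- def solution(painting, n, m):
--     # Single raster-scan connected-component labeling with label merging
--     # (no BFS/DFS flood fill): each nonzero cell joins the component of its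
--     # up/left nonzero neighbours, merging the two labels when they differ.
--     label = {}
--     next_id = 0
--     for i in range(n):
--         for j in range(m):
--             if painting[i][j] != 0:
--                 ns = []
--                 if i > 0 and painting[i - 1][j] != 0:
--                     ns.append(label[(i - 1, j)])
--                 if j > 0 and painting[i][j - 1] != 0:
--                     ns.append(label[(i, j - 1)])
--                 if not ns:
--                     label[(i, j)] = next_id
--                     next_id += 1
--                 else:
--                     a = ns[0]
--                     for b in ns[1:]:
--                         if b != a:
--                             for cell in [c for c, v in label.items() if v == b]:
--                                 label[cell] = a
--                     label[(i, j)] = a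
--     sizes = Counter(label.values())
--     num, mx, seen = 0, 0, set()
--     for i in range(n):
--         for j in range(m):
--             if painting[i][j] == 1:
--                 l = label[(i, j)]
--                 if l not in seen:
--                     seen.add(l)
--                     num += 1
--                     mx = max(mx, sizes[l])
--     return num, mx
-- ===== Notes on version B (the rewrite author's own statement) =====
-- stated objective: alternative
-- what changed: A's per-component BFS flood fill (deque queue + boolean visited matrix) is replaced by a single raster-scan connected-component labeling pass: each nonzero cell gets the label of its up/left nonzero neighbours (merging the two labels by relabeling when they differ), then component count and max size are read off a Counter of the labels; there is no flood fill, queue, stack or visited structure.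
-- outside the precondition, e.g. on solution([[0, 1]], 1, 1): A returns (0, 0), B returns (0, 0); on solution([[0, 0], [0, 1]], 1, 2): A returns (0, 0), B returns (0, 0)
import Mathlib
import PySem

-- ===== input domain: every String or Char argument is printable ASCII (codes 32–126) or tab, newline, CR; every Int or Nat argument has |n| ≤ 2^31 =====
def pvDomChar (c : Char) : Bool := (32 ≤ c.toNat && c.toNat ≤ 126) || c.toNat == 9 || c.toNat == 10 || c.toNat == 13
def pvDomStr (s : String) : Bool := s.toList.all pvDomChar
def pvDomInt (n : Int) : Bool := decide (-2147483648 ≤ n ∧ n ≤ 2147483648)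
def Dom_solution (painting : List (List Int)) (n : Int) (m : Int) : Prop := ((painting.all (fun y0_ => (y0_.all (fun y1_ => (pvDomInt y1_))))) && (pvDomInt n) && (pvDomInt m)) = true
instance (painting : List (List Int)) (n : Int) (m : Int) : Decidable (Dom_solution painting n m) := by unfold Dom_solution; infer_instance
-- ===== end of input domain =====

-- B replaces A's per-component BFS flood fill (deque + boolean visited matrix) by a single
-- raster-scan connected-component labeling pass (labels merged by relabeling) with count/max
-- read off a Counter of the labels; same return value on Pre_ (no observable mutation in either).

-- ===== PORT A =====
-- Grid indexing helpers: every read/write the Python performs is guarded in-bounds with a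
-- non-negative index under Pre_, so indexing is ported totally via getD/toNat.
def pvCell (P : List (List Int)) (y x : Int) : Int := (P.getD y.toNat []).getD x.toNat 0

def pvWidth (P : List (List Int)) : Nat := (P.headD []).length

def pvInb (P : List (List Int)) (y x : Int) : Bool :=
  decide (0 ≤ y ∧ y < (P.length : Int) ∧ 0 ≤ x ∧ x < (pvWidth P : Int))

def pvVGet (v : List (List Bool)) (y x : Int) : Bool := (v.getD y.toNat []).getD x.toNat false

def pvVSet (v : List (List Bool)) (y x : Int) : List (List Bool) :=
  v.modify y.toNat (fun row => row.set x.toNat true)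

-- totality guard for marking (under Pre_ it is implied by pvInb; Python would raise outside Pre_)
def pvVOk (v : List (List Bool)) (y x : Int) : Bool :=
  decide (y.toNat < v.length ∧ x.toNat < (v.getD y.toNat []).length)

def pvDirs : List (Int × Int) := [(1, 0), (-1, 0), (0, 1), (0, -1)]

-- body of A's inner `for dy, dx in …` loop
def pvStepA (P : List (List Int)) (cy cx : Int) (st : List (List Bool) × List (Int × Int))
    (d : Int × Int) : List (List Bool) × List (Int × Int) :=
  if pvInb P (cy + d.1) (cx + d.2) && pvVOk st.1 (cy + d.1) (cx + d.2) then
    if pvVGet st.1 (cy + d.1) (cx + d.2) || (pvCell P (cy + d.1) (cx + d.2) == 0) then st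
    else (pvVSet st.1 (cy + d.1) (cx + d.2), st.2 ++ [(cy + d.1, cx + d.2)])
  else st

-- cells of the grid rectangle (for the termination measure of A's flood)
def pvAllCells (P : List (List Int)) : List (Int × Int) :=
  (PySem.List.pyRange 0 P.length 1).product (PySem.List.pyRange 0 (pvWidth P) 1)

def pvFreshA (P : List (List Int)) (v : List (List Bool)) : Nat :=
  (pvAllCells P).countP (fun p => !pvVGet v p.1 p.2)

-- A's bfs loop (queue popped from the front); the fuel argument is a pure totality guard:
-- the caller passes the decreasing measure (fresh cells + queue length), proved sufficient in
-- pvBfsA_spec, so the 0-fuel branch is never taken on a run the Python performs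
def pvBfsA (P : List (List Int)) (fuel : Nat) (v : List (List Bool)) (q : List (Int × Int))
    (area : Int) : List (List Bool) × Int :=
  match fuel with
  | 0 => (v, area)
  | fuel + 1 =>
    match q with
    | [] => (v, area)
    | c :: rest =>
      let st := pvDirs.foldl (pvStepA P c.1 c.2) (v, rest)
      pvBfsA P fuel st.1 st.2 (area + 1)

-- body of A's inner `for j in range(m)` loop
def pvInnerA (P : List (List Int)) (i : Int) (st : List (List Bool) × Int × Int) (j : Int) :
    List (List Bool) × Int × Int :=
  if pvCell P i j == 1 && !(pvVGet st.1 i j) then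
    let r := pvBfsA P (pvFreshA P (pvVSet st.1 i j) + 1) (pvVSet st.1 i j) [(i, j)] 0
    (r.1, st.2.1 + 1, max r.2 st.2.2)
  else st

def solution (painting : List (List Int)) (n : Int) (m : Int) : Int × Int :=
  let v0 := List.replicate n.toNat (List.replicate m.toNat false)
  let fin := (PySem.List.pyRange 0 n 1).foldl
    (fun st i => (PySem.List.pyRange 0 m 1).foldl (pvInnerA painting i) st) (v0, (0 : Int), (0 : Int))
  (fin.2.1, fin.2.2)

-- ===== PORT B =====
-- B's neighbour-label list `ns` (dict lookups label[(i-1,j)] / label[(i,j-1)]: on every state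
-- the run reaches, the key is present — the total getD 0 rendering is exact there)
def pvNbrLabels (P : List (List Int)) (lab : PySem.Dict (Int × Int) Int) (i j : Int) :
    List Int :=
  (if 0 < i ∧ pvCell P (i - 1) j ≠ 0 then [lab.getD (i - 1, j) 0] else [])
    ++ (if 0 < j ∧ pvCell P i (j - 1) ≠ 0 then [lab.getD (i, j - 1) 0] else [])

-- `for cell in [c for c, v in label.items() if v == b]: label[cell] = a`
def pvRelabel (lab : PySem.Dict (Int × Int) Int) (b a : Int) : PySem.Dict (Int × Int) Int :=
  (lab.items.filter (fun kv => kv.2 == b)).foldl (fun d kv => d.insert kv.1 a) lab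

-- body of B's labeling `for j in range(m)` loop; state = (label, next_id)
def pvLabStep (P : List (List Int)) (i : Int) (st : PySem.Dict (Int × Int) Int × Int)
    (j : Int) : PySem.Dict (Int × Int) Int × Int :=
  if pvCell P i j ≠ 0 then
    match pvNbrLabels P st.1 i j with
    | [] => (st.1.insert (i, j) st.2, st.2 + 1)
    | a :: rest =>
      let lab := rest.foldl (fun d b => if b ≠ a then pvRelabel d b a else d) st.1
      (lab.insert (i, j) a, st.2)
  else st

def pvLabels (P : List (List Int)) (n m : Int) : PySem.Dict (Int × Int) Int :=
  ((PySem.List.pyRange 0 n 1).foldl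
    (fun st i => (PySem.List.pyRange 0 m 1).foldl (pvLabStep P i) st)
    ((PySem.Dict.empty : PySem.Dict (Int × Int) Int), (0 : Int))).1

-- body of B's counting `for j in range(m)` loop; state = (num, mx, seen)
def pvScanStep (P : List (List Int)) (lab : PySem.Dict (Int × Int) Int)
    (sizes : PySem.Dict Int Int) (i : Int) (st : Int × Int × PySem.Set Int) (j : Int) :
    Int × Int × PySem.Set Int :=
  if pvCell P i j == 1 then
    let l := lab.getD (i, j) 0
    if PySem.Set.contains st.2.2 l then st
    else (st.1 + 1, max st.2.1 (sizes.getD l 0), PySem.Set.add st.2.2 l)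
  else st

def solution_alt (painting : List (List Int)) (n : Int) (m : Int) : Int × Int :=
  let lab := pvLabels painting n m
  let sizes := PySem.Dict.counter lab.values
  let fin := (PySem.List.pyRange 0 n 1).foldl
    (fun st i => (PySem.List.pyRange 0 m 1).foldl (pvScanStep painting lab sizes i) st)
    ((0 : Int), (0 : Int), (PySem.Set.empty : PySem.Set Int))
  (fin.1, fin.2.1)

-- ===== PRECONDITION & SPEC =====
-- Pre_ admits the natural domain of consistent dimensions (n = number of rows, every row of
-- length m) plus the trivial degenerate scans n ≤ 0 / m ≤ 0 (empty loops in both programs);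
-- other inconsistent (painting, n, m) are excluded: there A's visited-matrix bookkeeping
-- raises IndexError on most inputs (while B, with no matrix, may still return a value).
def Pre_solution (painting : List (List Int)) (n : Int) (m : Int) : Prop :=
  (n = (painting.length : Int) ∧ ∀ r ∈ painting, (r.length : Int) = m) ∨ n ≤ 0 ∨ m ≤ 0

instance (painting : List (List Int)) (n : Int) (m : Int) : Decidable (Pre_solution painting n m) := by
  unfold Pre_solution; infer_instance

def pvWitness_solution : List (List Int) × Int × Int := ([[1, 0], [0, 1]], 2, 2)

def Spec_solution (painting : List (List Int)) (n : Int) (m : Int) (out : Int × Int) : Prop :=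
  out = solution_alt painting n m

instance (painting : List (List Int)) (n : Int) (m : Int) (out : Int × Int) :
    Decidable (Spec_solution painting n m out) := by unfold Spec_solution; infer_instance

-- ===== CLAIM (what is proved, stated in full; the proofs are below) =====
def Claim_equal_solution : Prop := ∀ (painting : List (List Int)) (n : Int) (m : Int),
  Dom_solution painting n m → Pre_solution painting n m →
  Spec_solution painting n m (solution painting n m)

-- ===== LEMMAS AND PROOFS =====

lemma pvMem_allCells (P : List (List Int)) (p : Int × Int) :
    p ∈ pvAllCells P ↔ (0 ≤ p.1 ∧ p.1 < (P.length : Int) ∧ 0 ≤ p.2 ∧ p.2 < (pvWidth P : Int)) := by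
  obtain ⟨a, b⟩ := p
  rw [pvAllCells, List.pair_mem_product, PySem.List.mem_pyRange_one, PySem.List.mem_pyRange_one]
  exact ⟨fun ⟨⟨h1, h2⟩, h3, h4⟩ => ⟨h1, h2, h3, h4⟩, fun ⟨h1, h2, h3, h4⟩ => ⟨⟨h1, h2⟩, h3, h4⟩⟩

lemma pvNodup_allCells (P : List (List Int)) : (pvAllCells P).Nodup :=
  List.Nodup.product (PySem.List.nodup_pyRange_one _ _) (PySem.List.nodup_pyRange_one _ _)

-- one flip of a fresh cell drops a countP by exactly one
lemma pvCountP_flip {α : Type} [DecidableEq α] {l : List α} (hl : l.Nodup) {a : α} (ha : a ∈ l)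
    {p q : α → Bool} (hpa : p a = true) (hqa : q a = false)
    (hrest : ∀ x ∈ l, x ≠ a → q x = p x) :
    l.countP q + 1 = l.countP p := by
  induction l with
  | nil => cases ha
  | cons x t ih =>
    rcases List.mem_cons.mp ha with rfl | hat
    · have hq : ∀ y ∈ t, q y = p y := fun y hy =>
        hrest y (List.mem_cons_of_mem _ hy) (fun h => (List.nodup_cons.mp hl).1 (h ▸ hy))
      have hc : t.countP q = t.countP p := List.countP_congr (fun y hy => by rw [hq y hy])
      simp [List.countP_cons, hqa, hpa, hc]
    · have hx : x ≠ a := fun h => (List.nodup_cons.mp hl).1 (h ▸ hat)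
      have := ih (List.nodup_cons.mp hl).2 hat (fun y hy hne => hrest y (List.mem_cons_of_mem _ hy) hne)
      simp only [List.countP_cons, hrest x (List.mem_cons_self) hx]
      omega

lemma pvVGet_pvVSet_self (v : List (List Bool)) {y x : Int}
    (h1 : y.toNat < v.length) (h2 : x.toNat < (v.getD y.toNat []).length) :
    pvVGet (pvVSet v y x) y x = true := by
  have hrow : v.getD y.toNat [] = v[y.toNat] := by
    rw [List.getD_eq_getElem?_getD, List.getElem?_eq_getElem h1]; rfl
  rw [hrow] at h2
  simp only [pvVGet, pvVSet, List.getD_eq_getElem?_getD, List.getElem?_modify,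
    List.getElem?_eq_getElem h1]
  simp [List.getElem?_set_self h2]

lemma pvVGet_pvVSet_ne (v : List (List Bool)) {y x y' x' : Int}
    (hne : y'.toNat ≠ y.toNat ∨ x'.toNat ≠ x.toNat) :
    pvVGet (pvVSet v y x) y' x' = pvVGet v y' x' := by
  simp only [pvVGet, pvVSet, List.getD_eq_getElem?_getD, List.getElem?_modify]
  by_cases hy : y.toNat = y'.toNat
  · have hx : x'.toNat ≠ x.toNat := by tauto
    cases h : v[y'.toNat]? with
    | none => simp [h]
    | some row =>
      simp [h, hy, List.getD_eq_getElem?_getD, List.getElem?_set_ne (fun hc => hx hc.symm)]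
  · cases h : v[y'.toNat]? with
    | none => simp [h]
    | some row => simp [h, hy]

lemma pvStepA_phi (P : List (List Int)) (cy cx : Int) (st : List (List Bool) × List (Int × Int))
    (d : Int × Int) :
    (pvStepA P cy cx st d).2.length + pvFreshA P (pvStepA P cy cx st d).1
      = st.2.length + pvFreshA P st.1 := by
  unfold pvStepA
  split
  · split
    · rfl
    · rename_i hg hv
      simp only [pvInb, pvVOk, Bool.and_eq_true, decide_eq_true_eq] at hg
      simp only [Bool.or_eq_true, not_or, Bool.not_eq_true] at hv
      have hmem : (cy + d.1, cx + d.2) ∈ pvAllCells P := by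
        rw [pvMem_allCells]; exact ⟨hg.1.1, hg.1.2.1, hg.1.2.2.1, hg.1.2.2.2⟩
      have hfresh : pvFreshA P (pvVSet st.1 (cy + d.1) (cx + d.2)) + 1 = pvFreshA P st.1 := by
        apply pvCountP_flip (pvNodup_allCells P) hmem
        · simpa using hv.1
        · simp [pvVGet_pvVSet_self st.1 hg.2.1 hg.2.2]
        · intro z hz hzne
          simp only [Bool.not_inj_iff]
          apply pvVGet_pvVSet_ne
          rw [pvMem_allCells] at hmem hz
          by_contra hc
          push_neg at hc
          exact hzne (Prod.ext (by omega) (by omega))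
      simp only [List.length_append, List.length_cons, List.length_nil]
      omega
  · rfl

lemma pvFoldl_phi {α β : Type} (f : β → α → β) (Φ : β → Nat) (l : List α)
    (h : ∀ st a, Φ (f st a) = Φ st) (st : β) : Φ (l.foldl f st) = Φ st := by
  induction l generalizing st with
  | nil => rfl
  | cons a t ih => rw [List.foldl_cons, ih, h]

-- 4-neighbour adjacency and eligibility (in bounds, nonzero paint)
def pvAdj (u p : Int × Int) : Prop :=
  p = (u.1 + 1, u.2) ∨ p = (u.1 - 1, u.2) ∨ p = (u.1, u.2 + 1) ∨ p = (u.1, u.2 - 1)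

def pvElig (P : List (List Int)) (p : Int × Int) : Prop :=
  pvInb P p.1 p.2 = true ∧ pvCell P p.1 p.2 ≠ 0

-- cells reachable from the worklist Q through cells not already visited (V)
inductive pvReach (P : List (List Int)) (V Q : Int × Int → Prop) : Int × Int → Prop
  | base (p : Int × Int) (h : Q p) : pvReach P V Q p
  | step (u p : Int × Int) (hu : pvReach P V Q u) (ha : pvAdj u p) (he : pvElig P p)
      (hv : ¬ V p) : pvReach P V Q p

-- the loop invariant of A's flood: worklist cells are marked, and every marked cell is
-- either still on the worklist or has all its eligible neighbours marked
def pvInv (P : List (List Int)) (V Q : Int × Int → Prop) : Prop :=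
  (∀ p, Q p → V p) ∧ (∀ c, V c → Q c ∨ ∀ p, pvAdj c p → pvElig P p → V p)

def pvVp (v : List (List Bool)) (p : Int × Int) : Prop :=
  0 ≤ p.1 ∧ 0 ≤ p.2 ∧ pvVGet v p.1 p.2 = true

def pvShape (P : List (List Int)) (v : List (List Bool)) : Prop :=
  v.length = P.length ∧ ∀ r ∈ v, r.length = pvWidth P

lemma pvReach_congr {P : List (List Int)} {V V' Q Q' : Int × Int → Prop}
    (hV : ∀ p, V p ↔ V' p) (hQ : ∀ p, Q p ↔ Q' p) {c : Int × Int}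
    (h : pvReach P V Q c) : pvReach P V' Q' c := by
  induction h with
  | base p hp => exact .base p ((hQ p).mp hp)
  | step u p hu ha he hv ih => exact .step u p ih ha he (fun h' => hv ((hV p).mpr h'))

lemma pvReach_nil {P : List (List Int)} {V : Int × Int → Prop} {c : Int × Int}
    (h : pvReach P V (fun _ => False) c) : False := by
  induction h with
  | base p hp => exact hp
  | step u p hu ha he hv ih => exact ih

lemma pvInv_congr {P : List (List Int)} {V V' Q Q' : Int × Int → Prop}
    (hV : ∀ p, V p ↔ V' p) (hQ : ∀ p, Q p ↔ Q' p) (h : pvInv P V Q) : pvInv P V' Q' := by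
  obtain ⟨h1, h2⟩ := h
  refine ⟨fun p hp => (hV p).mp (h1 p ((hQ p).mpr hp)), fun c hc => ?_⟩
  rcases h2 c ((hV c).mpr hc) with hq | hcl
  · exact Or.inl ((hQ c).mp hq)
  · exact Or.inr (fun p ha he => (hV p).mp (hcl p ha he))

-- the key step: popping a marked worklist cell u and pushing its fresh eligible neighbours N
-- changes neither the visited-or-reachable set nor the invariant
lemma pvS_step (P : List (List Int)) (V Q R N : Int × Int → Prop) (u : Int × Int)
    (hQ : ∀ p, Q p ↔ (p = u ∨ R p))
    (hN : ∀ p, N p ↔ (pvAdj u p ∧ pvElig P p ∧ ¬ V p))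
    (hInv : pvInv P V Q) :
    (∀ c, (V c ∨ pvReach P V Q c) ↔
      ((V c ∨ N c) ∨ pvReach P (fun p => V p ∨ N p) (fun p => R p ∨ N p) c))
    ∧ pvInv P (fun p => V p ∨ N p) (fun p => R p ∨ N p) := by
  obtain ⟨hQV, hCl⟩ := hInv
  have hVu : V u := hQV u ((hQ u).mpr (Or.inl rfl))
  constructor
  · intro c
    constructor
    · rintro (hc | hc)
      · exact Or.inl (Or.inl hc)
      · induction hc with
        | base p hp =>
          rcases (hQ p).mp hp with rfl | hr
          · exact Or.inl (Or.inl hVu)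
          · exact Or.inr (.base p (Or.inl hr))
        | step u' p hu' ha he hv ih =>
          by_cases hNp : N p
          · exact Or.inl (Or.inr hNp)
          · rcases ih with (hV' | hN') | hR'
            · rcases hCl u' hV' with hQ' | hcl
              · rcases (hQ u').mp hQ' with rfl | hr
                · exact absurd ((hN p).mpr ⟨ha, he, hv⟩) hNp
                · exact Or.inr (.step u' p (.base u' (Or.inl hr)) ha he
                    (fun h' => h'.elim hv hNp))
              · exact absurd (hcl p ha he) hv
            · exact Or.inr (.step u' p (.base u' (Or.inr hN')) ha he
                (fun h' => h'.elim hv hNp))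
            · exact Or.inr (.step u' p hR' ha he (fun h' => h'.elim hv hNp))
    · rintro ((hc | hc) | hc)
      · exact Or.inl hc
      · obtain ⟨ha, he, hv⟩ := (hN c).mp hc
        exact Or.inr (.step u c (.base u ((hQ u).mpr (Or.inl rfl))) ha he hv)
      · induction hc with
        | base p hp =>
          rcases hp with hr | hn
          · exact Or.inr (.base p ((hQ p).mpr (Or.inr hr)))
          · obtain ⟨ha, he, hv⟩ := (hN p).mp hn
            exact Or.inr (.step u p (.base u ((hQ u).mpr (Or.inl rfl))) ha he hv)
        | step u' p hu' ha he hv ih =>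
          have hvp : ¬ V p := fun h' => hv (Or.inl h')
          rcases ih with hV' | hR'
          · rcases hCl u' hV' with hQ' | hcl
            · exact Or.inr (.step u' p (.base u' hQ') ha he hvp)
            · exact absurd (hcl p ha he) hvp
          · exact Or.inr (.step u' p hR' ha he hvp)
  · constructor
    · rintro p (hr | hn)
      · exact hQV p ((hQ p).mpr (Or.inr hr)) |> Or.inl
      · exact Or.inr hn
    · rintro c (hV | hN')
      · rcases hCl c hV with hQ' | hcl
        · rcases (hQ c).mp hQ' with rfl | hr
          · refine Or.inr (fun p ha he => ?_)
            by_cases hvp : V p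
            · exact Or.inl hvp
            · exact Or.inr ((hN p).mpr ⟨ha, he, hvp⟩)
          · exact Or.inl (Or.inl hr)
        · exact Or.inr (fun p ha he => Or.inl (hcl p ha he))
      · exact Or.inl (Or.inr hN')

-- marking one in-range cell adds exactly that cell to the visited predicate
lemma pvVp_pvVSet (v : List (List Bool)) {y x : Int} (hy : 0 ≤ y) (hx : 0 ≤ x)
    (h1 : y.toNat < v.length) (h2 : x.toNat < (v.getD y.toNat []).length) (p : Int × Int) :
    pvVp (pvVSet v y x) p ↔ (pvVp v p ∨ p = (y, x)) := by
  by_cases hp : p = (y, x)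
  · subst hp
    simp only [pvVp, or_true, iff_true]
    exact ⟨hy, hx, pvVGet_pvVSet_self v h1 h2⟩
  · constructor
    · rintro ⟨hp1, hp2, hg⟩
      refine Or.inl ⟨hp1, hp2, ?_⟩
      rw [← hg]
      symm
      apply pvVGet_pvVSet_ne
      by_contra hc
      push_neg at hc
      exact hp (Prod.ext (by omega) (by omega))
    · rintro (⟨hp1, hp2, hg⟩ | hc)
      · refine ⟨hp1, hp2, ?_⟩
        rw [← hg]
        apply pvVGet_pvVSet_ne
        by_contra hc
        push_neg at hc
        exact hp (Prod.ext (by omega) (by omega))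
      · exact absurd hc hp

lemma pvShape_pvVSet (P : List (List Int)) (v : List (List Bool)) (y x : Int)
    (hsh : pvShape P v) : pvShape P (pvVSet v y x) := by
  obtain ⟨hlen, hrows⟩ := hsh
  refine ⟨by rw [pvVSet, List.length_modify]; exact hlen, fun r hr => ?_⟩
  unfold pvVSet at hr
  by_cases hy : y.toNat < v.length
  · rw [List.modify_eq_set_getElem?, List.getElem?_eq_getElem hy] at hr
    replace hr : r ∈ v.set y.toNat (v[y.toNat].set x.toNat true) := hr
    rcases List.mem_or_eq_of_mem_set hr with h | h
    · exact hrows r h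
    · rw [h, List.length_set]
      exact hrows _ (List.getElem_mem hy)
  · rw [List.modify_eq_self (by omega)] at hr
    exact hrows r hr

lemma pvVOk_of_inb (P : List (List Int)) (v : List (List Bool)) (y x : Int)
    (hsh : pvShape P v) (h : pvInb P y x = true) : pvVOk v y x = true := by
  obtain ⟨hlen, hrows⟩ := hsh
  simp only [pvInb, decide_eq_true_eq] at h
  simp only [pvVOk, decide_eq_true_eq]
  have h1 : y.toNat < v.length := by omega
  have hrow : v.getD y.toNat [] = v[y.toNat] := by
    rw [List.getD_eq_getElem?_getD, List.getElem?_eq_getElem h1]; rfl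
  have : v[y.toNat].length = pvWidth P := hrows _ (List.getElem_mem h1)
  rw [hrow]
  omega

-- one step of A's neighbour loop, characterized (under the shape invariant)
lemma pvStepA_char (P : List (List Int)) (cy cx : Int) (st : List (List Bool) × List (Int × Int))
    (d : Int × Int) (hsh : pvShape P st.1) :
    pvShape P (pvStepA P cy cx st d).1
    ∧ (∀ p, pvVp (pvStepA P cy cx st d).1 p ↔
        (pvVp st.1 p ∨ (p = (cy + d.1, cx + d.2) ∧ pvElig P (cy + d.1, cx + d.2)
          ∧ ¬ pvVp st.1 (cy + d.1, cx + d.2))))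
    ∧ (∀ p, p ∈ (pvStepA P cy cx st d).2 ↔
        (p ∈ st.2 ∨ (p = (cy + d.1, cx + d.2) ∧ pvElig P (cy + d.1, cx + d.2)
          ∧ ¬ pvVp st.1 (cy + d.1, cx + d.2)))) := by
  by_cases hinb : pvInb P (cy + d.1) (cx + d.2) = true
  · have hvok := pvVOk_of_inb P st.1 _ _ hsh hinb
    have hnn : 0 ≤ cy + d.1 ∧ 0 ≤ cx + d.2 := by
      simp only [pvInb, decide_eq_true_eq] at hinb; exact ⟨hinb.1, hinb.2.2.1⟩
    by_cases hskip : (pvVGet st.1 (cy + d.1) (cx + d.2) || (pvCell P (cy + d.1) (cx + d.2) == 0)) = true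
    · have hstep : pvStepA P cy cx st d = st := by
        unfold pvStepA; rw [if_pos (by rw [hinb, hvok]; rfl), if_pos hskip]
      rw [hstep]
      rcases Bool.or_eq_true_iff.mp hskip with hv | hz
      · have hvp : pvVp st.1 (cy + d.1, cx + d.2) := ⟨hnn.1, hnn.2, hv⟩
        exact ⟨hsh, fun p => by tauto, fun p => by tauto⟩
      · have : ¬ pvElig P (cy + d.1, cx + d.2) := by
          simp only [pvElig, not_and, not_not]
          intro _; simpa using hz
        exact ⟨hsh, fun p => by tauto, fun p => by tauto⟩
    · have hstep : pvStepA P cy cx st d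
          = (pvVSet st.1 (cy + d.1) (cx + d.2), st.2 ++ [(cy + d.1, cx + d.2)]) := by
        unfold pvStepA; rw [if_pos (by rw [hinb, hvok]; rfl), if_neg hskip]
      simp only [Bool.or_eq_true, not_or, Bool.not_eq_true, beq_eq_false_iff_ne] at hskip
      simp only [pvVOk, decide_eq_true_eq] at hvok
      have helig : pvElig P (cy + d.1, cx + d.2) := ⟨hinb, hskip.2⟩
      have hnvp : ¬ pvVp st.1 (cy + d.1, cx + d.2) := by
        rintro ⟨-, -, hg⟩; rw [hskip.1] at hg; cases hg
      rw [hstep]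
      refine ⟨pvShape_pvVSet P st.1 _ _ hsh, fun p => ?_, fun p => ?_⟩
      · rw [pvVp_pvVSet st.1 hnn.1 hnn.2 hvok.1 hvok.2 p]
        tauto
      · simp only [List.mem_append, List.mem_singleton]
        tauto
  · have hstep : pvStepA P cy cx st d = st := by
      unfold pvStepA
      rw [if_neg (by rw [Bool.and_eq_true]; tauto)]
    have : ¬ pvElig P (cy + d.1, cx + d.2) := fun he => hinb he.1
    rw [hstep]
    exact ⟨hsh, fun p => by tauto, fun p => by tauto⟩

-- A's neighbour loop over a list of offsets with pairwise-distinct targets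
lemma pvFoldA_char (P : List (List Int)) (c : Int × Int) :
    ∀ (D : List (Int × Int)) (v : List (List Bool)) (rest : List (Int × Int)),
    pvShape P v →
    D.Pairwise (fun d d' => ((c.1 + d.1, c.2 + d.2) : Int × Int) ≠ (c.1 + d'.1, c.2 + d'.2)) →
    pvShape P (D.foldl (pvStepA P c.1 c.2) (v, rest)).1
    ∧ (∀ p, pvVp (D.foldl (pvStepA P c.1 c.2) (v, rest)).1 p ↔
        (pvVp v p ∨ ((∃ d ∈ D, p = (c.1 + d.1, c.2 + d.2)) ∧ pvElig P p ∧ ¬ pvVp v p)))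
    ∧ (∀ p, p ∈ (D.foldl (pvStepA P c.1 c.2) (v, rest)).2 ↔
        (p ∈ rest ∨ ((∃ d ∈ D, p = (c.1 + d.1, c.2 + d.2)) ∧ pvElig P p ∧ ¬ pvVp v p))) := by
  intro D
  induction D with
  | nil => exact fun v rest hsh _ => ⟨hsh, fun p => by simp, fun p => by simp⟩
  | cons d D' ih =>
    intro v rest hsh hpw
    obtain ⟨hpwh, hpwt⟩ := List.pairwise_cons.mp hpw
    obtain ⟨hsh1, hv1, hq1⟩ := pvStepA_char P c.1 c.2 (v, rest) d hsh
    simp only [List.foldl_cons]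
    obtain ⟨hsh2, hv2, hq2⟩ := ih (pvStepA P c.1 c.2 (v, rest) d).1
      (pvStepA P c.1 c.2 (v, rest) d).2 hsh1 hpwt
    refine ⟨hsh2, fun p => ?_, fun p => ?_⟩
    · rw [hv2 p, hv1 p]
      dsimp only
      simp only [List.mem_cons, or_and_right, exists_or, exists_eq_left]
      by_cases hpt : p = (c.1 + d.1, c.2 + d.2)
      · subst hpt
        have hne : ¬ ∃ d' ∈ D', ((c.1 + d.1, c.2 + d.2) : Int × Int) = (c.1 + d'.1, c.2 + d'.2) := by
          rintro ⟨d', hd', he⟩; exact hpwh d' hd' he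
        tauto
      · tauto
    · rw [hq2 p, hq1 p, hv1 p]
      dsimp only
      simp only [List.mem_cons, or_and_right, exists_or, exists_eq_left]
      by_cases hpt : p = (c.1 + d.1, c.2 + d.2)
      · subst hpt
        have hne : ¬ ∃ d' ∈ D', ((c.1 + d.1, c.2 + d.2) : Int × Int) = (c.1 + d'.1, c.2 + d'.2) := by
          rintro ⟨d', hd', he⟩; exact hpwh d' hd' he
        tauto
      · tauto

lemma pvDirs_targets (c p : Int × Int) :
    (∃ d ∈ pvDirs, p = ((c.1 + d.1, c.2 + d.2) : Int × Int)) ↔ pvAdj c p := by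
  simp only [pvDirs, pvAdj, List.mem_cons, List.not_mem_nil, or_false, exists_eq_left,
    or_and_right, exists_or, exists_eq_left']
  constructor
  · rintro (h | h | h | h) <;>
      [exact Or.inl (by rw [h]; simp);
       exact Or.inr (Or.inl (by rw [h]; simp [Prod.ext_iff]; omega));
       exact Or.inr (Or.inr (Or.inl (by rw [h]; simp)));
       exact Or.inr (Or.inr (Or.inr (by rw [h]; simp [Prod.ext_iff]; omega)))]
  · rintro (h | h | h | h) <;>
      [exact Or.inl (by rw [h]; simp);
       exact Or.inr (Or.inl (by rw [h]; simp [Prod.ext_iff]; omega));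
       exact Or.inr (Or.inr (Or.inl (by rw [h]; simp)));
       exact Or.inr (Or.inr (Or.inr (by rw [h]; simp [Prod.ext_iff]; omega)))]

lemma pvPairwise4 {α : Type} (R : α → α → Prop) (a b c d : α)
    (hab : R a b) (hac : R a c) (had : R a d) (hbc : R b c) (hbd : R b d) (hcd : R c d) :
    ([a, b, c, d] : List α).Pairwise R := by
  simp [List.pairwise_cons, hab, hac, had, hbc, hbd, hcd]

lemma pvDirs_pairwise (c : Int × Int) :
    pvDirs.Pairwise (fun d d' => ((c.1 + d.1, c.2 + d.2) : Int × Int) ≠ (c.1 + d'.1, c.2 + d'.2)) := by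
  apply pvPairwise4 <;> (intro h; simp only [Prod.mk.injEq] at h; omega)

-- full characterization of A's bfs loop
lemma pvBfsA_spec (P : List (List Int)) :
    ∀ (fuel : Nat) (v : List (List Bool)) (q : List (Int × Int)) (area : Int),
    pvFreshA P v + q.length ≤ fuel →
    pvShape P v → pvInv P (pvVp v) (· ∈ q) →
    pvShape P (pvBfsA P fuel v q area).1
    ∧ (∀ p, pvVp (pvBfsA P fuel v q area).1 p ↔ (pvVp v p ∨ pvReach P (pvVp v) (· ∈ q) p))
    ∧ pvInv P (pvVp (pvBfsA P fuel v q area).1) (fun _ => False)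
    ∧ (pvBfsA P fuel v q area).2 + (pvFreshA P (pvBfsA P fuel v q area).1 : Int)
        = area + q.length + (pvFreshA P v : Int) := by
  intro fuel
  induction fuel with
  | zero =>
    intro v q area hfuel hsh hinv
    have hq : q = [] := List.eq_nil_of_length_eq_zero (by omega)
    subst hq
    rw [pvBfsA]
    refine ⟨hsh, fun p => ?_, ?_, by simp⟩
    · constructor
      · exact fun h => Or.inl h
      · rintro (h | h)
        · exact h
        · exact absurd (pvReach_congr (fun _ => Iff.rfl) (fun p => by simp) h) pvReach_nil
    · exact pvInv_congr (fun _ => Iff.rfl) (fun p => by simp) hinv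
  | succ fuel ih =>
    intro v q area hfuel hsh hinv
    match q with
    | [] =>
      rw [pvBfsA]
      refine ⟨hsh, fun p => ?_, ?_, by simp⟩
      · constructor
        · exact fun h => Or.inl h
        · rintro (h | h)
          · exact h
          · exact absurd (pvReach_congr (fun _ => Iff.rfl) (fun p => by simp) h) pvReach_nil
      · exact pvInv_congr (fun _ => Iff.rfl) (fun p => by simp) hinv
    | c :: rest =>
    have hunfold : pvBfsA P (fuel + 1) v (c :: rest) area
        = pvBfsA P fuel (pvDirs.foldl (pvStepA P c.1 c.2) (v, rest)).1
            (pvDirs.foldl (pvStepA P c.1 c.2) (v, rest)).2 (area + 1) := rfl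
    obtain ⟨hsh1, hv1, hq1⟩ := pvFoldA_char P c pvDirs v rest hsh (pvDirs_pairwise c)
    have hv1' : ∀ p, pvVp (pvDirs.foldl (pvStepA P c.1 c.2) (v, rest)).1 p
        ↔ (pvVp v p ∨ (pvAdj c p ∧ pvElig P p ∧ ¬ pvVp v p)) := fun p => by
      rw [hv1 p, pvDirs_targets c p]
    have hq1' : ∀ p, p ∈ (pvDirs.foldl (pvStepA P c.1 c.2) (v, rest)).2
        ↔ (p ∈ rest ∨ (pvAdj c p ∧ pvElig P p ∧ ¬ pvVp v p)) := fun p => by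
      rw [hq1 p, pvDirs_targets c p]
    have hS := pvS_step P (pvVp v) (· ∈ c :: rest) (· ∈ rest)
      (fun p => pvAdj c p ∧ pvElig P p ∧ ¬ pvVp v p) c
      (fun p => List.mem_cons) (fun p => Iff.rfl) hinv
    have hinv1 : pvInv P (pvVp (pvDirs.foldl (pvStepA P c.1 c.2) (v, rest)).1)
        (· ∈ (pvDirs.foldl (pvStepA P c.1 c.2) (v, rest)).2) :=
      pvInv_congr (fun p => ((hv1' p).symm)) (fun p => ((hq1' p).symm)) hS.2
    have hΦ := pvFoldl_phi (pvStepA P c.1 c.2) (fun st => st.2.length + pvFreshA P st.1) pvDirs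
      (fun st d => pvStepA_phi P c.1 c.2 st d) (v, rest)
    simp only at hΦ
    have hfuel1 : pvFreshA P (pvDirs.foldl (pvStepA P c.1 c.2) (v, rest)).1
        + (pvDirs.foldl (pvStepA P c.1 c.2) (v, rest)).2.length ≤ fuel := by
      simp only [List.length_cons] at hfuel
      omega
    obtain ⟨hshF, hvF, hinvF, hareaF⟩ := ih (pvDirs.foldl (pvStepA P c.1 c.2) (v, rest)).1
      (pvDirs.foldl (pvStepA P c.1 c.2) (v, rest)).2 (area + 1) hfuel1 hsh1 hinv1
    have hiff : ∀ p, (pvVp (pvDirs.foldl (pvStepA P c.1 c.2) (v, rest)).1 p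
        ∨ pvReach P (pvVp (pvDirs.foldl (pvStepA P c.1 c.2) (v, rest)).1)
            (· ∈ (pvDirs.foldl (pvStepA P c.1 c.2) (v, rest)).2) p)
        ↔ (pvVp v p ∨ pvReach P (pvVp v) (· ∈ c :: rest) p) := by
      intro p
      exact Iff.trans (or_congr (hv1' p)
        ⟨fun h => pvReach_congr (fun z => (hv1' z)) (fun z => (hq1' z)) h,
         fun h => pvReach_congr (fun z => (hv1' z).symm) (fun z => (hq1' z).symm) h⟩)
        ((hS.1 p).symm)
    rw [hunfold]
    refine ⟨hshF, fun p => ?_, hinvF, ?_⟩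
    · rw [hvF p, hiff p]
    · rw [hareaF]
      have hlen : ((c :: rest).length : Int) = (rest.length : Int) + 1 := by
        rw [List.length_cons]; push_cast; ring
      push_cast at hΦ
      omega

-- the initial all-false visited matrix marks nothing
lemma pvVGet_replicate (a b : Nat) (y x : Int) :
    pvVGet (List.replicate a (List.replicate b false)) y x = false := by
  rw [pvVGet]
  have houter : (List.replicate a (List.replicate b false)).getD y.toNat []
      = if y.toNat < a then List.replicate b false else [] := by
    split
    · rename_i hlt
      rw [List.getD_eq_getElem?_getD, List.getElem?_replicate, if_pos hlt]
      rfl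
    · rename_i hge
      rw [List.getD_eq_getElem?_getD, List.getElem?_replicate, if_neg hge]
      rfl
  rw [houter]
  split
  · rw [List.getD_eq_getElem?_getD, List.getElem?_replicate]
    split <;> rfl
  · rfl

lemma pvVp_init (a b : Nat) (p : Int × Int) :
    ¬ pvVp (List.replicate a (List.replicate b false)) p := by
  rintro ⟨h1, h2, hg⟩
  rw [pvVGet_replicate] at hg
  cases hg

lemma pvFoldl_id {α β : Type} : ∀ (l : List α) (s : β), l.foldl (fun s _ => s) s = s := by
  intro l
  induction l with
  | nil => exact fun s => rfl
  | cons a t ih => exact fun s => ih s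

lemma pvFoldl_rel {α β γ : Type} (R : β → γ → Prop) (f : β → α → β) (g : γ → α → γ)
    (l : List α) (h : ∀ b c a, a ∈ l → R b c → R (f b a) (g c a)) :
    ∀ b c, R b c → R (l.foldl f b) (l.foldl g c) := by
  induction l with
  | nil => exact fun b c hr => hr
  | cons a t ih =>
    exact fun b c hr =>
      ih (fun b' c' a' ha' => h b' c' a' (List.mem_cons_of_mem _ ha')) _ _
        (h b c a List.mem_cons_self hr)

-- ===== chain connectivity (for B) =====

inductive pvChain (G : Int × Int → Prop) : Int × Int → Int × Int → Prop
  | refl (p : Int × Int) (h : G p) : pvChain G p p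
  | tail (u v w : Int × Int) (h : pvChain G u v) (ha : pvAdj v w) (hw : G w) : pvChain G u w

lemma pvAdj_symm {u p : Int × Int} (h : pvAdj u p) : pvAdj p u := by
  rcases h with h | h | h | h <;> subst h <;>
    simp [pvAdj, Prod.ext_iff] <;> omega

lemma pvChain_left {G : Int × Int → Prop} {u v : Int × Int} (h : pvChain G u v) : G u := by
  induction h with
  | refl hp => exact hp
  | tail b w hch ha hw ih => exact ih

lemma pvChain_right {G : Int × Int → Prop} {u v : Int × Int} (h : pvChain G u v) : G v := by
  cases h with
  | refl hp => exact hp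
  | tail b w hch ha hw => exact hw

lemma pvChain_trans {G : Int × Int → Prop} {u v w : Int × Int}
    (h1 : pvChain G u v) (h2 : pvChain G v w) : pvChain G u w := by
  induction h2 with
  | refl hp => exact h1
  | tail b w' hch ha hw ih => exact .tail _ _ _ ih ha hw

lemma pvChain_single {G : Int × Int → Prop} {u v : Int × Int}
    (hu : G u) (hv : G v) (ha : pvAdj u v) : pvChain G u v :=
  .tail u u v (.refl u hu) ha hv

lemma pvChain_symm {G : Int × Int → Prop} {u v : Int × Int} (h : pvChain G u v) :
    pvChain G v u := by
  induction h with
  | refl hp => exact .refl _ hp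
  | tail b w hch ha hw ih =>
    exact pvChain_trans (pvChain_single hw (pvChain_right hch) (pvAdj_symm ha)) ih

lemma pvChain_mono {G G' : Int × Int → Prop} (hm : ∀ p, G p → G' p) {u v : Int × Int}
    (h : pvChain G u v) : pvChain G' u v := by
  induction h with
  | refl hp => exact .refl _ (hm _ hp)
  | tail b w hch ha hw ih => exact .tail _ _ _ ih ha (hm _ hw)

lemma pvChain_congr {G G' : Int × Int → Prop} (hm : ∀ p, G p ↔ G' p) (u v : Int × Int) :
    pvChain G u v ↔ pvChain G' u v :=
  ⟨pvChain_mono (fun p => (hm p).mp), pvChain_mono (fun p => (hm p).mpr)⟩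

-- cells that would be connected to the new cell c once it is added
def pvTouch (G : Int × Int → Prop) (c w : Int × Int) : Prop :=
  w = c ∨ ∃ nb, pvAdj c nb ∧ pvChain G nb w

-- adding one vertex c to the allowed set: chains either avoid c or pass through it
lemma pvChain_add {G : Int × Int → Prop} {c : Int × Int} (u v : Int × Int) :
    pvChain (fun p => G p ∨ p = c) u v ↔
      (pvChain G u v ∨ (pvTouch G c u ∧ pvTouch G c v)) := by
  constructor
  · intro h
    induction h with
    | refl hp =>
      rcases hp with hp | rfl
      · exact Or.inl (.refl _ hp)
      · exact Or.inr ⟨Or.inl rfl, Or.inl rfl⟩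
    | tail b w hch ha hw ih =>
      rcases hw with hw | rfl
      · rcases ih with hab | ⟨hta, htb⟩
        · exact Or.inl (.tail _ _ _ hab ha hw)
        · refine Or.inr ⟨hta, ?_⟩
          rcases htb with rfl | ⟨nb, hnb, hchain⟩
          · exact Or.inr ⟨w, ha, .refl w hw⟩
          · exact Or.inr ⟨nb, hnb, .tail _ _ _ hchain ha hw⟩
      · rcases ih with hab | ⟨hta, htb⟩
        · exact Or.inr ⟨Or.inr ⟨b, pvAdj_symm ha, pvChain_symm hab⟩, Or.inl rfl⟩
        · exact Or.inr ⟨hta, Or.inl rfl⟩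
  · rintro (h | ⟨hta, htb⟩)
    · exact pvChain_mono (fun p hp => Or.inl hp) h
    · have hGc' : G c ∨ c = c := Or.inr rfl
      have toC : ∀ w, pvTouch G c w → pvChain (fun p => G p ∨ p = c) c w := by
        rintro w (rfl | ⟨nb, hnb, hchain⟩)
        · exact .refl _ hGc'
        · exact pvChain_trans
            (.tail _ _ _ (.refl _ hGc') hnb (Or.inl (pvChain_left hchain)))
            (pvChain_mono (fun p hp => Or.inl hp) hchain)
      exact pvChain_trans (pvChain_symm (toC u hta)) (toC v htb)

-- ===== dict helpers for B =====

lemma pvFoldInsertConst_get? (L : List ((Int × Int) × Int)) (a : Int)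
    (d : PySem.Dict (Int × Int) Int) (p : Int × Int) :
    ((L.foldl (fun d kv => d.insert kv.1 a) d).get? p)
      = if p ∈ L.map Prod.fst then some a else d.get? p := by
  induction L generalizing d with
  | nil => simp
  | cons kv t ih =>
    rw [List.foldl_cons, ih]
    by_cases hp : p ∈ t.map Prod.fst
    · simp [hp]
    · by_cases hk : p = kv.1
      · subst hk
        simp [hp, PySem.Dict.get?_insert]
      · simp [hp, hk, PySem.Dict.get?_insert]

lemma pvRelabel_get? (lab : PySem.Dict (Int × Int) Int) (b a : Int)
    (hnd : lab.keys.Nodup) (p : Int × Int) :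
    (pvRelabel lab b a).get? p
      = if lab.get? p = some b then some a else lab.get? p := by
  rw [pvRelabel, pvFoldInsertConst_get?]
  congr 1
  simp only [eq_iff_iff, List.mem_map, List.mem_filter]
  constructor
  · rintro ⟨kv, ⟨hmem, hval⟩, rfl⟩
    have : kv.2 = b := by simpa using hval
    subst this
    exact (PySem.Dict.get?_eq_some_iff_mem_items lab kv.1 kv.2 hnd).mpr hmem
  · intro h
    exact ⟨(p, b), ⟨(PySem.Dict.get?_eq_some_iff_mem_items lab p b hnd).mp h, by simp⟩, rfl⟩

lemma pvRelabel_nodup (lab : PySem.Dict (Int × Int) Int) (b a : Int)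
    (hnd : lab.keys.Nodup) : (pvRelabel lab b a).keys.Nodup := by
  rw [pvRelabel]
  exact PySem.Dict.nodup_keys_foldl_insert_key _ Prod.fst (fun _ _ => a) lab hnd

-- ===== counting helpers =====

lemma pvCountP_eq_of_iff {α : Type} {l1 l2 : List α}
    (h1 : l1.Nodup) (h2 : l2.Nodup) (p q : α → Bool)
    (h : ∀ x, (x ∈ l1 ∧ p x = true) ↔ (x ∈ l2 ∧ q x = true)) :
    l1.countP p = l2.countP q := by
  rw [List.countP_eq_length_filter, List.countP_eq_length_filter]
  apply List.Perm.length_eq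
  apply (List.perm_ext_iff_of_nodup (h1.filter p) (h2.filter q)).mpr
  intro x
  rw [List.mem_filter, List.mem_filter]
  exact h x

lemma pvCountP_disj_add {α : Type} (l : List α) (f g : α → Bool)
    (hdisj : ∀ x ∈ l, ¬(f x = true ∧ g x = true)) :
    l.countP (fun x => f x || g x) = l.countP f + l.countP g := by
  induction l with
  | nil => rfl
  | cons x t ih =>
    have ht := ih (fun y hy => hdisj y (List.mem_cons_of_mem _ hy))
    have hx := hdisj x List.mem_cons_self
    simp only [List.countP_cons, ht]
    cases hf : f x <;> cases hg : g x <;> simp_all <;> omega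

-- ===== labeling pass invariant =====

-- cells already processed by the raster scan at position (i, j)
def pvProc (P : List (List Int)) (i j : Int) (p : Int × Int) : Prop :=
  pvElig P p ∧ (p.1 < i ∨ (p.1 = i ∧ p.2 < j))

def pvLabInv (P : List (List Int)) (G : Int × Int → Prop)
    (st : PySem.Dict (Int × Int) Int × Int) : Prop :=
  st.1.keys.Nodup
  ∧ (∀ p, (st.1.get? p).isSome ↔ G p)
  ∧ (∀ p q, G p → G q → (st.1.get? p = st.1.get? q ↔ pvChain G p q))
  ∧ (∀ p l, st.1.get? p = some l → l < st.2)

lemma pvLabInv_congr {P : List (List Int)} {G G' : Int × Int → Prop}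
    (hm : ∀ p, G p ↔ G' p) {st : PySem.Dict (Int × Int) Int × Int}
    (h : pvLabInv P G st) : pvLabInv P G' st := by
  obtain ⟨h1, h2, h3, h4⟩ := h
  refine ⟨h1, fun p => (h2 p).trans (hm p), fun p q hp hq => ?_, h4⟩
  rw [h3 p q ((hm p).mpr hp) ((hm q).mpr hq)]
  exact pvChain_congr hm p q

-- label classes of the processed neighbours characterize pvTouch
lemma pvTouch_attach {P : List (List Int)} {G : Int × Int → Prop}
    {lab : PySem.Dict (Int × Int) Int} {nid : Int}
    (hinv : pvLabInv P G (lab, nid)) {c : Int × Int} {a : Int}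
    (ha : ∃ w0, G w0 ∧ pvAdj c w0 ∧ lab.get? w0 = some a)
    (hall : ∀ w, G w → pvAdj c w → lab.get? w = some a) (w : Int × Int) :
    pvTouch G c w ↔ (w = c ∨ (G w ∧ lab.get? w = some a)) := by
  obtain ⟨-, -, hE, -⟩ := hinv
  constructor
  · rintro (rfl | ⟨nb, hnb, hch⟩)
    · exact Or.inl rfl
    · have hGnb := pvChain_left hch
      have hGw := pvChain_right hch
      refine Or.inr ⟨hGw, ?_⟩
      rw [← (hE nb w hGnb hGw).mpr hch]
      exact hall nb hGnb hnb
  · rintro (rfl | ⟨hGw, hlw⟩)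
    · exact Or.inl rfl
    · obtain ⟨w0, hG0, ha0, hl0⟩ := ha
      exact Or.inr ⟨w0, ha0, (hE w0 w hG0 hGw).mp (hl0.trans hlw.symm)⟩

lemma pvTouch_merge {P : List (List Int)} {G : Int × Int → Prop}
    {lab : PySem.Dict (Int × Int) Int} {nid : Int}
    (hinv : pvLabInv P G (lab, nid)) {c : Int × Int} {a b : Int}
    (hwa : ∃ w0, G w0 ∧ pvAdj c w0 ∧ lab.get? w0 = some a)
    (hwb : ∃ w0, G w0 ∧ pvAdj c w0 ∧ lab.get? w0 = some b)
    (hall : ∀ w, G w → pvAdj c w → (lab.get? w = some a ∨ lab.get? w = some b))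
    (w : Int × Int) :
    pvTouch G c w ↔ (w = c ∨ (G w ∧ (lab.get? w = some a ∨ lab.get? w = some b))) := by
  obtain ⟨-, -, hE, -⟩ := hinv
  constructor
  · rintro (rfl | ⟨nb, hnb, hch⟩)
    · exact Or.inl rfl
    · have hGnb := pvChain_left hch
      have hGw := pvChain_right hch
      refine Or.inr ⟨hGw, ?_⟩
      rw [← (hE nb w hGnb hGw).mpr hch]
      exact hall nb hGnb hnb
  · rintro (rfl | ⟨hGw, hlw | hlw⟩)
    · exact Or.inl rfl
    · obtain ⟨w0, hG0, ha0, hl0⟩ := hwa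
      exact Or.inr ⟨w0, ha0, (hE w0 w hG0 hGw).mp (hl0.trans hlw.symm)⟩
    · obtain ⟨w0, hG0, ha0, hl0⟩ := hwb
      exact Or.inr ⟨w0, ha0, (hE w0 w hG0 hGw).mp (hl0.trans hlw.symm)⟩

-- case: no processed neighbour — c starts a fresh singleton class with the fresh id
lemma pvLabInv_case0 (P : List (List Int)) (G : Int × Int → Prop) (c : Int × Int)
    (lab : PySem.Dict (Int × Int) Int) (nid : Int) (hGc : ¬ G c)
    (hinv : pvLabInv P G (lab, nid)) (hN : ∀ w, G w → pvAdj c w → False) :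
    pvLabInv P (fun p => G p ∨ p = c) (lab.insert c nid, nid + 1) := by
  obtain ⟨hnd, hK, hE, hF⟩ := hinv
  simp only at hnd hK hE hF
  have htouch : ∀ w, pvTouch G c w ↔ w = c := by
    intro w
    constructor
    · rintro (rfl | ⟨nb, hnb, hch⟩)
      · rfl
      · exact absurd hnb (fun h => hN nb (pvChain_left hch) h)
    · rintro rfl; exact Or.inl rfl
  refine ⟨PySem.Dict.nodup_keys_insert lab c nid hnd, ?_, ?_, ?_⟩
  · intro p
    rw [PySem.Dict.get?_insert]
    by_cases hp : p = c
    · simp [hp]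
    · simp only [if_neg hp, hK p]
      tauto
  · intro p q hp hq
    rw [pvChain_add (G := G) (c := c) p q, htouch p, htouch q,
      PySem.Dict.get?_insert, PySem.Dict.get?_insert]
    by_cases hpc : p = c <;> by_cases hqc : q = c
    · rw [if_pos hpc, if_pos hqc]
      exact iff_of_true rfl (Or.inr ⟨hpc, hqc⟩)
    · rw [if_pos hpc, if_neg hqc]
      subst hpc
      have hGq : G q := hq.resolve_right hqc
      obtain ⟨lq, hlq⟩ := Option.isSome_iff_exists.mp ((hK q).mpr hGq)
      constructor
      · intro h
        rw [hlq] at h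
        have hnl : nid = lq := by simpa using h
        exact absurd (hnl ▸ hF q lq hlq) (lt_irrefl nid)
      · rintro (hch | ⟨-, hq'⟩)
        · exact absurd (pvChain_left hch) hGc
        · exact absurd hq' hqc
    · rw [if_neg hpc, if_pos hqc]
      subst hqc
      have hGp : G p := hp.resolve_right hpc
      obtain ⟨lp, hlp⟩ := Option.isSome_iff_exists.mp ((hK p).mpr hGp)
      constructor
      · intro h
        rw [hlp] at h
        have hnl : lp = nid := by simpa using h
        exact absurd (hnl ▸ hF p lp hlp) (lt_irrefl nid)
      · rintro (hch | ⟨hp', -⟩)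
        · exact absurd (pvChain_right hch) hGc
        · exact absurd hp' hpc
    · have hGp : G p := hp.resolve_right hpc
      have hGq : G q := hq.resolve_right hqc
      rw [if_neg hpc, if_neg hqc, hE p q hGp hGq]
      constructor
      · exact fun h => Or.inl h
      · rintro (h | ⟨hp', -⟩)
        · exact h
        · exact absurd hp' hpc
  · intro p l
    rw [PySem.Dict.get?_insert]
    split
    · intro h
      simp only [Option.some.injEq] at h
      omega
    · intro h; have := hF p l h; omega

-- case: all processed neighbours carry the same label a — c joins that class
lemma pvLabInv_attach (P : List (List Int)) (G : Int × Int → Prop) (c : Int × Int)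
    (lab : PySem.Dict (Int × Int) Int) (nid : Int) (a : Int) (hGc : ¬ G c)
    (hinv : pvLabInv P G (lab, nid))
    (ha : ∃ w0, G w0 ∧ pvAdj c w0 ∧ lab.get? w0 = some a)
    (hall : ∀ w, G w → pvAdj c w → lab.get? w = some a) :
    pvLabInv P (fun p => G p ∨ p = c) (lab.insert c a, nid) := by
  have htouch := pvTouch_attach hinv ha hall
  obtain ⟨hnd, hK, hE, hF⟩ := hinv
  simp only at hnd hK hE hF
  refine ⟨PySem.Dict.nodup_keys_insert lab c a hnd, ?_, ?_, ?_⟩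
  · intro p
    rw [PySem.Dict.get?_insert]
    by_cases hp : p = c
    · simp [hp]
    · simp only [if_neg hp, hK p]
      tauto
  · intro p q hp hq
    rw [pvChain_add (G := G) (c := c) p q, htouch p, htouch q,
      PySem.Dict.get?_insert, PySem.Dict.get?_insert]
    by_cases hpc : p = c <;> by_cases hqc : q = c
    · rw [if_pos hpc, if_pos hqc]
      exact iff_of_true rfl (Or.inr ⟨Or.inl hpc, Or.inl hqc⟩)
    · rw [if_pos hpc, if_neg hqc]
      subst hpc
      have hGq : G q := hq.resolve_right hqc
      constructor
      · intro h
        exact Or.inr ⟨Or.inl rfl, Or.inr ⟨hGq, h.symm⟩⟩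
      · rintro (hch | ⟨-, (hq' | ⟨-, hl⟩)⟩)
        · exact absurd (pvChain_left hch) hGc
        · exact absurd hq' hqc
        · exact hl.symm
    · rw [if_neg hpc, if_pos hqc]
      subst hqc
      have hGp : G p := hp.resolve_right hpc
      constructor
      · intro h
        exact Or.inr ⟨Or.inr ⟨hGp, h⟩, Or.inl rfl⟩
      · rintro (hch | ⟨(hp' | ⟨-, hl⟩), -⟩)
        · exact absurd (pvChain_right hch) hGc
        · exact absurd hp' hpc
        · exact hl
    · have hGp : G p := hp.resolve_right hpc
      have hGq : G q := hq.resolve_right hqc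
      rw [if_neg hpc, if_neg hqc, hE p q hGp hGq]
      constructor
      · exact fun h => Or.inl h
      · rintro (h | ⟨(hp' | ⟨-, hlp⟩), (hq' | ⟨-, hlq⟩)⟩)
        · exact h
        · exact absurd hp' hpc
        · exact absurd hp' hpc
        · exact absurd hq' hqc
        · exact (hE p q hGp hGq).mp (hlp.trans hlq.symm)
  · intro p l
    rw [PySem.Dict.get?_insert]
    obtain ⟨w0, hG0, -, hl0⟩ := ha
    split
    · intro h
      have hla : l = a := by simpa using h.symm
      subst hla
      exact hF w0 l hl0
    · exact hF p l

-- case: processed neighbours carry two labels a ≠ b — class b is relabeled to a, c joins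
lemma pvLabInv_merge (P : List (List Int)) (G : Int × Int → Prop) (c : Int × Int)
    (lab : PySem.Dict (Int × Int) Int) (nid : Int) (a b : Int) (hGc : ¬ G c)
    (hinv : pvLabInv P G (lab, nid))
    (hwa : ∃ w0, G w0 ∧ pvAdj c w0 ∧ lab.get? w0 = some a)
    (hwb : ∃ w0, G w0 ∧ pvAdj c w0 ∧ lab.get? w0 = some b)
    (hall : ∀ w, G w → pvAdj c w → (lab.get? w = some a ∨ lab.get? w = some b))
    (hab : a ≠ b) :
    pvLabInv P (fun p => G p ∨ p = c) ((pvRelabel lab b a).insert c a, nid) := by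
  have htouch := pvTouch_merge hinv hwa hwb hall
  obtain ⟨hnd, hK, hE, hF⟩ := hinv
  simp only at hnd hK hE hF
  have hrl : ∀ p, (pvRelabel lab b a).get? p
      = if lab.get? p = some b then some a else lab.get? p := pvRelabel_get? lab b a hnd
  have hfa : ∀ y : Option Int,
      (some a = if y = some b then some a else y) ↔ (y = some a ∨ y = some b) := by
    intro y
    by_cases hy : y = some b
    · simp [hy]
    · rw [if_neg hy]
      constructor
      · intro h; exact Or.inl h.symm
      · rintro (h | h)
        · exact h.symm
        · exact absurd h hy
  refine ⟨PySem.Dict.nodup_keys_insert _ c a (pvRelabel_nodup lab b a hnd), ?_, ?_, ?_⟩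
  · intro p
    rw [PySem.Dict.get?_insert]
    by_cases hp : p = c
    · simp [hp]
    · simp only [if_neg hp, hrl p]
      split
      · rename_i hb'
        simp only [Option.isSome_some, true_iff]
        exact Or.inl ((hK p).mp (by rw [hb']; rfl))
      · simp only [hK p]
        tauto
  · intro p q hp hq
    rw [pvChain_add (G := G) (c := c) p q, htouch p, htouch q,
      PySem.Dict.get?_insert, PySem.Dict.get?_insert]
    by_cases hpc : p = c <;> by_cases hqc : q = c
    · rw [if_pos hpc, if_pos hqc]
      exact iff_of_true rfl (Or.inr ⟨Or.inl hpc, Or.inl hqc⟩)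
    · rw [if_pos hpc, if_neg hqc, hrl q, hfa (lab.get? q)]
      subst hpc
      have hGq : G q := hq.resolve_right hqc
      constructor
      · intro h
        exact Or.inr ⟨Or.inl rfl, Or.inr ⟨hGq, h⟩⟩
      · rintro (hch | ⟨-, (hq' | ⟨-, hl⟩)⟩)
        · exact absurd (pvChain_left hch) hGc
        · exact absurd hq' hqc
        · exact hl
    · rw [if_neg hpc, if_pos hqc, hrl p]
      subst hqc
      have hGp : G p := hp.resolve_right hpc
      have hfa' : ((if lab.get? p = some b then some a else lab.get? p) = some a)
          ↔ (lab.get? p = some a ∨ lab.get? p = some b) := by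
        rw [← hfa (lab.get? p)]
        constructor
        · exact fun h => h.symm
        · exact fun h => h.symm
      rw [hfa']
      constructor
      · intro h
        exact Or.inr ⟨Or.inr ⟨hGp, h⟩, Or.inl rfl⟩
      · rintro (hch | ⟨(hp' | ⟨-, hl⟩), -⟩)
        · exact absurd (pvChain_right hch) hGc
        · exact absurd hp' hpc
        · exact hl
    · have hGp : G p := hp.resolve_right hpc
      have hGq : G q := hq.resolve_right hqc
      have hcollapse :
          ((if lab.get? p = some b then some a else lab.get? p)
              = (if lab.get? q = some b then some a else lab.get? q))
            ↔ (lab.get? p = lab.get? q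
                ∨ ((lab.get? p = some a ∨ lab.get? p = some b)
                    ∧ (lab.get? q = some a ∨ lab.get? q = some b))) := by
        by_cases hx : lab.get? p = some b <;> by_cases hy : lab.get? q = some b
        · rw [if_pos hx, if_pos hy]
          exact iff_of_true rfl (Or.inr ⟨Or.inr hx, Or.inr hy⟩)
        · rw [if_pos hx, if_neg hy]
          constructor
          · intro h
            exact Or.inr ⟨Or.inr hx, Or.inl h.symm⟩
          · rintro (h | ⟨-, (hq' | hq')⟩)
            · exact absurd (h ▸ hx) hy
            · exact hq'.symm
            · exact absurd hq' hy
        · rw [if_neg hx, if_pos hy]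
          constructor
          · intro h
            exact Or.inr ⟨Or.inl h, Or.inr hy⟩
          · rintro (h | ⟨(hp' | hp'), -⟩)
            · exact absurd (h.symm ▸ hy) hx
            · exact hp'
            · exact absurd hp' hx
        · rw [if_neg hx, if_neg hy]
          constructor
          · exact fun h => Or.inl h
          · rintro (h | ⟨(hp' | hp'), (hq' | hq')⟩)
            · exact h
            · exact hp'.trans hq'.symm
            · exact absurd hq' hy
            · exact absurd hp' hx
            · exact absurd hp' hx
      rw [if_neg hpc, if_neg hqc, hrl p, hrl q, hcollapse, hE p q hGp hGq]
      constructor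
      · rintro (h | ⟨hx, hy⟩)
        · exact Or.inl h
        · exact Or.inr ⟨Or.inr ⟨hGp, hx⟩, Or.inr ⟨hGq, hy⟩⟩
      · rintro (h | ⟨(hp' | ⟨-, hx⟩), (hq' | ⟨-, hy⟩)⟩)
        · exact Or.inl h
        · exact absurd hp' hpc
        · exact absurd hp' hpc
        · exact absurd hq' hqc
        · exact Or.inr ⟨hx, hy⟩
  · intro p l
    rw [PySem.Dict.get?_insert]
    obtain ⟨w0, hG0, -, hl0⟩ := hwa
    split
    · intro h
      have hla : l = a := by simpa using h.symm
      subst hla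
      exact hF w0 l hl0
    · rw [hrl p]
      split
      · intro h
        have hla : l = a := by simpa using h.symm
        subst hla
        exact hF w0 l hl0
      · exact hF p l

-- one labeling step preserves the invariant (consistent dimensions assumed)
lemma pvLabStep_inv (P : List (List Int)) (n m : Int)
    (hn : n = (P.length : Int)) (hw : 0 < n → (pvWidth P : Int) = m)
    (i j : Int) (hi0 : 0 ≤ i) (hin : i < n) (hj0 : 0 ≤ j) (hjm : j < m)
    (st : PySem.Dict (Int × Int) Int × Int)
    (hinv : pvLabInv P (pvProc P i j) st) :
    pvLabInv P (pvProc P i (j + 1)) (pvLabStep P i st j) := by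
  have hwm : (pvWidth P : Int) = m := hw (by omega)
  have hG' : ∀ p, pvProc P i (j + 1) p ↔ (pvProc P i j p ∨ (pvElig P p ∧ p = (i, j))) := by
    intro p
    unfold pvProc
    constructor
    · rintro ⟨he, hpos⟩
      by_cases hpc : p = (i, j)
      · exact Or.inr ⟨he, hpc⟩
      · refine Or.inl ⟨he, ?_⟩
        rcases hpos with h | ⟨h1, h2⟩
        · exact Or.inl h
        · refine Or.inr ⟨h1, ?_⟩
          rcases lt_or_eq_of_le (Int.lt_add_one_iff.mp h2) with h | h
          · exact h
          · exact absurd (Prod.ext h1 h) hpc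
    · rintro (⟨he, hpos⟩ | ⟨he, rfl⟩)
      · refine ⟨he, ?_⟩
        rcases hpos with h | ⟨h1, h2⟩
        · exact Or.inl h
        · exact Or.inr ⟨h1, by omega⟩
      · exact ⟨he, Or.inr ⟨rfl, by omega⟩⟩
  have hGc : ¬ pvProc P i j (i, j) := by
    rintro ⟨-, h | ⟨-, h⟩⟩ <;> simp only at h <;> omega
  by_cases hz : pvCell P i j = 0
  · have hstep : pvLabStep P i st j = st := by
      unfold pvLabStep
      rw [if_neg (by simpa using hz)]
    rw [hstep]
    refine pvLabInv_congr (fun p => ?_) hinv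
    rw [hG' p]
    constructor
    · exact fun h => Or.inl h
    · rintro (h | ⟨⟨-, hne⟩, rfl⟩)
      · exact h
      · exact absurd hz hne
  · have helig : pvElig P (i, j) := by
      refine ⟨?_, hz⟩
      simp only [pvInb, decide_eq_true_eq]
      omega
    have hNchar : ∀ w, pvProc P i j w → pvAdj (i, j) w → (w = (i - 1, j) ∨ w = (i, j - 1)) := by
      rintro w hPw (rfl | rfl | rfl | rfl)
      · obtain ⟨-, h | ⟨h, -⟩⟩ := hPw <;> simp only at h <;> omega
      · exact Or.inl rfl
      · obtain ⟨-, h | ⟨-, h⟩⟩ := hPw <;> simp only at h <;> omega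
      · exact Or.inr rfl
    have hup : (0 < i ∧ pvCell P (i - 1) j ≠ 0)
        ↔ (pvProc P i j (i - 1, j) ∧ pvAdj (i, j) (i - 1, j)) := by
      constructor
      · rintro ⟨h0, hc⟩
        refine ⟨⟨⟨?_, hc⟩, Or.inl (by omega)⟩, Or.inr (Or.inl rfl)⟩
        simp only [pvInb, decide_eq_true_eq]
        omega
      · rintro ⟨⟨⟨hinb, hc⟩, -⟩, -⟩
        simp only [pvInb, decide_eq_true_eq] at hinb
        exact ⟨by omega, hc⟩
    have hleft : (0 < j ∧ pvCell P i (j - 1) ≠ 0)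
        ↔ (pvProc P i j (i, j - 1) ∧ pvAdj (i, j) (i, j - 1)) := by
      constructor
      · rintro ⟨h0, hc⟩
        refine ⟨⟨⟨?_, hc⟩, Or.inr ⟨rfl, by omega⟩⟩, Or.inr (Or.inr (Or.inr rfl))⟩
        simp only [pvInb, decide_eq_true_eq]
        omega
      · rintro ⟨⟨⟨hinb, hc⟩, -⟩, -⟩
        simp only [pvInb, decide_eq_true_eq] at hinb
        exact ⟨by omega, hc⟩
    have hcongr : ∀ st', pvLabInv P (fun p => pvProc P i j p ∨ p = (i, j)) st' →
        pvLabInv P (pvProc P i (j + 1)) st' := by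
      intro st' h
      refine pvLabInv_congr (fun p => ?_) h
      rw [hG' p]
      constructor
      · rintro (h' | rfl)
        · exact Or.inl h'
        · exact Or.inr ⟨helig, rfl⟩
      · rintro (h' | ⟨-, rfl⟩)
        · exact Or.inl h'
        · exact Or.inr rfl
    obtain ⟨hnd, hK, hE, hF⟩ := hinv
    have hinv' : pvLabInv P (pvProc P i j) (st.1, st.2) := ⟨hnd, hK, hE, hF⟩
    by_cases hcu : 0 < i ∧ pvCell P (i - 1) j ≠ 0 <;>
      by_cases hcl : 0 < j ∧ pvCell P i (j - 1) ≠ 0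
    · -- both neighbours present
      obtain ⟨hPu, hAu⟩ := hup.mp hcu
      obtain ⟨hPl, hAl⟩ := hleft.mp hcl
      obtain ⟨au, hau⟩ := Option.isSome_iff_exists.mp ((hK (i - 1, j)).mpr hPu)
      obtain ⟨al, hal⟩ := Option.isSome_iff_exists.mp ((hK (i, j - 1)).mpr hPl)
      have hgu : st.1.getD (i - 1, j) 0 = au := by
        rw [PySem.Dict.getD_eq_get?_getD, hau]; rfl
      have hgl : st.1.getD (i, j - 1) 0 = al := by
        rw [PySem.Dict.getD_eq_get?_getD, hal]; rfl
      have hns : pvNbrLabels P st.1 i j = [au, al] := by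
        simp [pvNbrLabels, hcu, hcl, hgu, hgl]
      have hstep : pvLabStep P i st j
          = ((if al ≠ au then pvRelabel st.1 al au else st.1).insert (i, j) au, st.2) := by
        unfold pvLabStep
        rw [if_pos (by simpa using hz), hns]
        simp [List.foldl]
      rw [hstep]
      have hall2 : ∀ w, pvProc P i j w → pvAdj (i, j) w →
          (st.1.get? w = some au ∨ st.1.get? w = some al) := by
        intro w hPw hAw
        rcases hNchar w hPw hAw with rfl | rfl
        · exact Or.inl hau
        · exact Or.inr hal
      by_cases hd : al = au
      · subst hd
        rw [if_neg (by simp)]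
        refine hcongr _ (pvLabInv_attach P _ _ st.1 st.2 al hGc hinv'
          ⟨(i - 1, j), hPu, hAu, hau⟩ ?_)
        intro w hPw hAw
        rcases hall2 w hPw hAw with h | h <;> exact h
      · rw [if_pos (by simpa using fun h => hd h)]
        exact hcongr _ (pvLabInv_merge P _ _ st.1 st.2 au al hGc hinv'
          ⟨(i - 1, j), hPu, hAu, hau⟩ ⟨(i, j - 1), hPl, hAl, hal⟩ hall2
          (fun h => hd h.symm))
    · -- only the up neighbour
      obtain ⟨hPu, hAu⟩ := hup.mp hcu
      obtain ⟨au, hau⟩ := Option.isSome_iff_exists.mp ((hK (i - 1, j)).mpr hPu)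
      have hgu : st.1.getD (i - 1, j) 0 = au := by
        rw [PySem.Dict.getD_eq_get?_getD, hau]; rfl
      have hns : pvNbrLabels P st.1 i j = [au] := by
        simp [pvNbrLabels, hcu, hcl, hgu]
      have hstep : pvLabStep P i st j = (st.1.insert (i, j) au, st.2) := by
        unfold pvLabStep
        rw [if_pos (by simpa using hz), hns]
        simp [List.foldl]
      rw [hstep]
      refine hcongr _ (pvLabInv_attach P _ _ st.1 st.2 au hGc hinv'
        ⟨(i - 1, j), hPu, hAu, hau⟩ ?_)
      intro w hPw hAw
      rcases hNchar w hPw hAw with rfl | rfl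
      · exact hau
      · exact absurd (hleft.mpr ⟨hPw, hAw⟩) hcl
    · -- only the left neighbour
      obtain ⟨hPl, hAl⟩ := hleft.mp hcl
      obtain ⟨al, hal⟩ := Option.isSome_iff_exists.mp ((hK (i, j - 1)).mpr hPl)
      have hgl : st.1.getD (i, j - 1) 0 = al := by
        rw [PySem.Dict.getD_eq_get?_getD, hal]; rfl
      have hns : pvNbrLabels P st.1 i j = [al] := by
        simp [pvNbrLabels, hcu, hcl, hgl]
      have hstep : pvLabStep P i st j = (st.1.insert (i, j) al, st.2) := by
        unfold pvLabStep
        rw [if_pos (by simpa using hz), hns]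
        simp [List.foldl]
      rw [hstep]
      refine hcongr _ (pvLabInv_attach P _ _ st.1 st.2 al hGc hinv'
        ⟨(i, j - 1), hPl, hAl, hal⟩ ?_)
      intro w hPw hAw
      rcases hNchar w hPw hAw with rfl | rfl
      · exact absurd (hup.mpr ⟨hPw, hAw⟩) hcu
      · exact hal
    · -- no processed neighbour
      have hns : pvNbrLabels P st.1 i j = [] := by
        simp [pvNbrLabels, hcu, hcl]
      have hstep : pvLabStep P i st j = (st.1.insert (i, j) st.2, st.2 + 1) := by
        unfold pvLabStep
        rw [if_pos (by simpa using hz), hns]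
      rw [hstep]
      refine hcongr _ (pvLabInv_case0 P _ _ st.1 st.2 hGc hinv' ?_)
      intro w hPw hAw
      rcases hNchar w hPw hAw with rfl | rfl
      · exact hcu (hup.mpr ⟨hPw, hAw⟩)
      · exact hcl (hleft.mpr ⟨hPw, hAw⟩)

-- generic upward fold over pyRange lo..hi carrying an indexed invariant
lemma pvFoldRange_inv {β : Type} (f : β → Int → β) (Inv : Int → β → Prop) (hi : Int) :
    ∀ (k : Nat) (lo : Int), hi - lo = (k : Int) →
    (∀ j st, lo ≤ j → j < hi → Inv j st → Inv (j + 1) (f st j)) →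
    ∀ st, Inv lo st → Inv hi ((PySem.List.pyRange lo hi 1).foldl f st) := by
  intro k
  induction k with
  | zero =>
    intro lo hk hstep st h0
    have heq : hi = lo := by omega
    subst heq
    rw [PySem.List.pyRange_one_eq_nil (le_refl _)]
    exact h0
  | succ k ih =>
    intro lo hk hstep st h0
    have hlt : lo < hi := by omega
    rw [PySem.List.pyRange_one_cons hlt, List.foldl_cons]
    exact ih (lo + 1) (by omega) (fun j st' hj1 hj2 => hstep j st' (by omega) hj2) _
      (hstep lo st (le_refl _) hlt h0)

-- the labeling pass computes a labeling of exactly the eligible cells whose label classes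
-- are exactly the connected components
lemma pvLabels_final (P : List (List Int)) (n m : Int)
    (hn : n = (P.length : Int)) (hrows : ∀ r ∈ P, (r.length : Int) = m) :
    (pvLabels P n m).keys.Nodup
    ∧ (∀ p, ((pvLabels P n m).get? p).isSome ↔ pvElig P p)
    ∧ (∀ p q, pvElig P p → pvElig P q →
        ((pvLabels P n m).get? p = (pvLabels P n m).get? q ↔ pvChain (pvElig P) p q)) := by
  have hw : 0 < n → (pvWidth P : Int) = m := by
    intro hpos
    cases P with
    | nil => rw [hn] at hpos; simp at hpos
    | cons r t => exact hrows r List.mem_cons_self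
  have hinb_bounds : ∀ p : Int × Int, pvElig P p →
      0 ≤ p.1 ∧ p.1 < (P.length : Int) ∧ 0 ≤ p.2 ∧ p.2 < (pvWidth P : Int) := by
    intro p he
    have h := he.1
    simpa [pvInb, decide_eq_true_eq] using h
  have hInv0 : pvLabInv P (pvProc P 0 0)
      ((PySem.Dict.empty : PySem.Dict (Int × Int) Int), (0 : Int)) := by
    have hproc : ∀ p, ¬ pvProc P 0 0 p := by
      rintro p ⟨he, hpos⟩
      obtain ⟨h1, -, h3, -⟩ := hinb_bounds p he
      rcases hpos with h | ⟨-, h⟩ <;> omega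
    refine ⟨by simp, ?_, ?_, ?_⟩
    · intro p
      simp only [PySem.Dict.get?_empty, Option.isSome_none, Bool.false_eq_true, false_iff]
      exact hproc p
    · intro p q hp hq
      exact absurd hp (hproc p)
    · intro p l h
      rw [PySem.Dict.get?_empty] at h
      cases h
  have hstep_outer : ∀ i st, 0 ≤ i → i < n → pvLabInv P (pvProc P i 0) st →
      pvLabInv P (pvProc P (i + 1) 0)
        ((PySem.List.pyRange 0 m 1).foldl (pvLabStep P i) st) := by
    intro i st hi0 hin hinv
    have hwm : (pvWidth P : Int) = m := hw (by omega)
    have hm0 : 0 ≤ m := by rw [← hwm]; exact Int.natCast_nonneg _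
    have hres := pvFoldRange_inv (pvLabStep P i)
      (fun j st' => pvLabInv P (pvProc P i j) st') m m.toNat 0 (by omega)
      (fun j st' hj0 hjm hinv' => pvLabStep_inv P n m hn hw i j hi0 hin hj0 hjm st' hinv')
      st hinv
    refine pvLabInv_congr (fun p => ?_) hres
    unfold pvProc
    constructor
    · rintro ⟨he, hpos⟩
      obtain ⟨h1, h2, h3, h4⟩ := hinb_bounds p he
      rcases hpos with h | ⟨h5, h6⟩
      · exact ⟨he, Or.inl (by omega)⟩
      · exact ⟨he, Or.inl (by omega)⟩
    · rintro ⟨he, hpos⟩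
      obtain ⟨h1, h2, h3, h4⟩ := hinb_bounds p he
      refine ⟨he, ?_⟩
      rcases hpos with h | ⟨-, h⟩
      · by_cases hlt : p.1 < i
        · exact Or.inl hlt
        · exact Or.inr ⟨by omega, by omega⟩
      · omega
  have hn0 : 0 ≤ n := by rw [hn]; exact Int.natCast_nonneg _
  have hfin := pvFoldRange_inv
    (fun st i => (PySem.List.pyRange 0 m 1).foldl (pvLabStep P i) st)
    (fun i st => pvLabInv P (pvProc P i 0) st) n n.toNat 0 (by omega)
    (fun i st hi0 hin hinv => hstep_outer i st hi0 hin hinv)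
    ((PySem.Dict.empty : PySem.Dict (Int × Int) Int), (0 : Int)) hInv0
  have hfin' : pvLabInv P (pvElig P)
      ((PySem.List.pyRange 0 n 1).foldl
        (fun st i => (PySem.List.pyRange 0 m 1).foldl (pvLabStep P i) st)
        ((PySem.Dict.empty : PySem.Dict (Int × Int) Int), (0 : Int))) := by
    refine pvLabInv_congr (fun p => ?_) hfin
    unfold pvProc
    constructor
    · rintro ⟨he, -⟩
      exact he
    · intro he
      obtain ⟨h1, h2, h3, h4⟩ := hinb_bounds p he
      exact ⟨he, Or.inl (by omega)⟩
  obtain ⟨h1, h2, h3, -⟩ := hfin'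
  exact ⟨h1, h2, h3⟩

-- ===== bridging A's flood to chains =====

def pvClosed (P : List (List Int)) (V : Int × Int → Prop) : Prop :=
  ∀ c p, V c → pvAdj c p → pvElig P p → V p

lemma pvChain_into_closed {P : List (List Int)} {V : Int × Int → Prop}
    (hcl : pvClosed P V) {q p : Int × Int} (h : pvChain (pvElig P) q p) (hq : V q) : V p := by
  induction h with
  | refl _ => exact hq
  | tail b w hch ha hw ih => exact hcl b w ih ha hw

lemma pvReach_iff_chain (P : List (List Int)) (v : List (List Bool)) (c : Int × Int)
    (hcl : pvClosed P (pvVp v)) (hce : pvElig P c) (hcv : ¬ pvVp v c)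
    (hy : 0 ≤ c.1) (hx : 0 ≤ c.2)
    (h1 : c.1.toNat < v.length) (h2 : c.2.toNat < (v.getD c.1.toNat []).length) (p : Int × Int) :
    pvReach P (pvVp (pvVSet v c.1 c.2)) (· ∈ ([c] : List (Int × Int))) p
      ↔ pvChain (pvElig P) c p := by
  have hnn1 : 0 ≤ c.1 := hy
  have hdisj : ∀ q, pvChain (pvElig P) c q → ¬ pvVp v q := by
    intro q hq hvq
    exact hcv (pvChain_into_closed hcl (pvChain_symm hq) hvq)
  constructor
  · intro h
    induction h with
    | base p hp =>
      have : p = c := List.mem_singleton.mp hp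
      subst this
      exact .refl p hce
    | step u p hu ha he hv ih => exact .tail c u p ih ha he
  · intro h
    induction h with
    | refl hp => exact .base _ (List.mem_singleton.mpr rfl)
    | tail b w hch ha hw ih =>
      by_cases hwc : w = c
      · subst hwc
        exact .base w (List.mem_singleton.mpr rfl)
      · refine .step b w ih ha hw ?_
        intro hvw
        rcases (pvVp_pvVSet v hy hx h1 h2 w).mp hvw with hvw' | hwc'
        · exact hdisj w (.tail c b w hch ha hw) hvw'
        · exact hwc (by rw [hwc'])

-- component size read from the Counter of the final labels
lemma pvSizes_eq (P : List (List Int)) (lab : PySem.Dict (Int × Int) Int)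
    (hndL : lab.keys.Nodup)
    (hKL : ∀ p, (lab.get? p).isSome ↔ pvElig P p)
    (l0 : Int) :
    (PySem.Dict.counter lab.values).getD l0 0
      = (((pvAllCells P).countP (fun q => lab.get? q == some l0) : Nat) : Int) := by
  rw [PySem.Dict.getD_counter]
  congr 1
  rw [PySem.Dict.values_eq_map_keys lab hndL 0, List.count_eq_countP, List.countP_map]
  apply pvCountP_eq_of_iff hndL (pvNodup_allCells P)
  intro x
  constructor
  · rintro ⟨hmem, hbeq⟩
    have hsome : (lab.get? x).isSome := by
      rw [Option.isSome_iff_ne_none]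
      intro hnone
      exact (PySem.Dict.get?_eq_none_iff_not_mem_keys lab x).mp hnone hmem
    obtain ⟨v, hv⟩ := Option.isSome_iff_exists.mp hsome
    have hgd : lab.getD x 0 = v := by rw [PySem.Dict.getD_eq_get?_getD, hv]; rfl
    have hveq : v = l0 := by
      have := hbeq
      simp only [Function.comp_apply, beq_iff_eq] at this
      rw [hgd] at this
      exact this
    have helig : pvElig P x := (hKL x).mp hsome
    have hbounds := helig.1
    simp only [pvInb, decide_eq_true_eq] at hbounds
    refine ⟨(pvMem_allCells P x).mpr hbounds, ?_⟩
    rw [hv, hveq]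
    simp
  · rintro ⟨hmem, hbeq⟩
    have hv : lab.get? x = some l0 := by simpa using hbeq
    have hsome : (lab.get? x).isSome := by rw [hv]; rfl
    refine ⟨?_, ?_⟩
    · by_contra hnk
      rw [← PySem.Dict.get?_eq_none_iff_not_mem_keys] at hnk
      rw [hnk] at hsome
      cases hsome
    · simp only [Function.comp_apply, beq_iff_eq]
      rw [PySem.Dict.getD_eq_get?_getD, hv]
      rfl

-- the joint relation between A's scan state and B's counting state
def pvRel2 (P : List (List Int)) (lab : PySem.Dict (Int × Int) Int)
    (stA : List (List Bool) × Int × Int) (stB : Int × Int × PySem.Set Int) : Prop :=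
  pvShape P stA.1
  ∧ pvInv P (pvVp stA.1) (fun _ => False)
  ∧ (∀ p, pvVp stA.1 p ↔ ∃ l, lab.get? p = some l ∧ l ∈ stB.2.2)
  ∧ stA.2.1 = stB.1 ∧ stA.2.2 = stB.2.1

-- one scan cell preserves the joint relation
lemma pvScan_rel (P : List (List Int)) (n m : Int) (lab : PySem.Dict (Int × Int) Int)
    (sizes : PySem.Dict Int Int)
    (hn : n = (P.length : Int)) (hwm : (pvWidth P : Int) = m)
    (hndL : lab.keys.Nodup)
    (hKL : ∀ p, (lab.get? p).isSome ↔ pvElig P p)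
    (hEL : ∀ p q, pvElig P p → pvElig P q →
        (lab.get? p = lab.get? q ↔ pvChain (pvElig P) p q))
    (hsize : ∀ l0 : Int, sizes.getD l0 0
        = (((pvAllCells P).countP (fun q => lab.get? q == some l0) : Nat) : Int))
    (i j : Int) (hi0 : 0 ≤ i) (hin : i < n) (hj0 : 0 ≤ j) (hjm : j < m)
    (stA : List (List Bool) × Int × Int) (stB : Int × Int × PySem.Set Int)
    (hrel : pvRel2 P lab stA stB) :
    pvRel2 P lab (pvInnerA P i stA j) (pvScanStep P lab sizes i stB j) := by
  by_cases hone : pvCell P i j = 1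
  · obtain ⟨hsh, hinv, hvis, hc1, hc2⟩ := hrel
    have helig : pvElig P (i, j) :=
      ⟨by simp only [pvInb, decide_eq_true_eq]; omega, by rw [hone]; exact one_ne_zero⟩
    obtain ⟨l0, hl0⟩ := Option.isSome_iff_exists.mp ((hKL (i, j)).mpr helig)
    have hgd : lab.getD (i, j) 0 = l0 := by rw [PySem.Dict.getD_eq_get?_getD, hl0]; rfl
    by_cases hmem : l0 ∈ stB.2.2
    · -- the component was already counted: both sides skip
      have hvg : pvVGet stA.1 i j = true :=
        ((hvis (i, j)).mpr ⟨l0, hl0, hmem⟩).2.2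
      have hA : pvInnerA P i stA j = stA := by
        unfold pvInnerA
        rw [if_neg (by simp [hvg])]
      have hB : pvScanStep P lab sizes i stB j = stB := by
        unfold pvScanStep
        rw [if_pos (by simp [hone])]
        simp only [hgd]
        rw [if_pos ((PySem.Set.contains_iff _ _).mpr hmem)]
      rw [hA, hB]
      exact ⟨hsh, hinv, hvis, hc1, hc2⟩
    · -- a new component: A floods it, B counts its label
      have hnv : ¬ pvVp stA.1 (i, j) := by
        intro hvp
        obtain ⟨l, hl, hls⟩ := (hvis _).mp hvp
        rw [hl0] at hl
        exact hmem ((Option.some_inj.mp hl) ▸ hls)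
      have hvg : pvVGet stA.1 i j = false := by
        cases hv : pvVGet stA.1 i j with
        | true => exact absurd ⟨hi0, hj0, hv⟩ hnv
        | false => rfl
      have hr1 : i.toNat < stA.1.length := by rw [hsh.1]; omega
      have hr2 : j.toNat < (stA.1.getD i.toNat []).length := by
        have hrow : stA.1.getD i.toNat [] = stA.1[i.toNat] := by
          rw [List.getD_eq_getElem?_getD, List.getElem?_eq_getElem hr1]; rfl
        rw [hrow, hsh.2 _ (List.getElem_mem hr1)]
        omega
      have hclosed : pvClosed P (pvVp stA.1) :=
        fun cc pp hv ha he => ((hinv.2 cc hv).resolve_left (fun f => f)) pp ha he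
      have hv1 := pvVp_pvVSet stA.1 hi0 hj0 hr1 hr2
      have hsh1 : pvShape P (pvVSet stA.1 i j) := pvShape_pvVSet P stA.1 i j hsh
      have hinvA1 : pvInv P (pvVp (pvVSet stA.1 i j)) (· ∈ ([(i, j)] : List (Int × Int))) := by
        constructor
        · intro p hp
          rw [List.mem_singleton] at hp
          exact (hv1 p).mpr (Or.inr hp)
        · intro cc hcc
          rcases (hv1 cc).mp hcc with hcA | rfl
          · rcases hinv.2 cc hcA with hf | hcl
            · cases hf
            · exact Or.inr (fun p ha he => (hv1 p).mpr (Or.inl (hcl p ha he)))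
          · exact Or.inl (List.mem_singleton.mpr rfl)
      obtain ⟨hshF, hvF, hinvF, hareaF⟩ :=
        pvBfsA_spec P (pvFreshA P (pvVSet stA.1 i j) + 1) (pvVSet stA.1 i j) [(i, j)] 0
          (by simp) hsh1 hinvA1
      have hric := pvReach_iff_chain P stA.1 (i, j) hclosed helig hnv hi0 hj0 hr1 hr2
      have hVfinal : ∀ p, pvVp (pvBfsA P (pvFreshA P (pvVSet stA.1 i j) + 1) (pvVSet stA.1 i j) [(i, j)] 0).1 p
          ↔ (pvVp stA.1 p ∨ pvChain (pvElig P) (i, j) p) := by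
        intro p
        rw [hvF p]
        constructor
        · rintro (h1 | h2)
          · rcases (hv1 p).mp h1 with h | rfl
            · exact Or.inl h
            · exact Or.inr (.refl _ helig)
          · exact Or.inr ((hric p).mp h2)
        · rintro (h1 | h2)
          · exact Or.inl ((hv1 p).mpr (Or.inl h1))
          · exact Or.inr ((hric p).mpr h2)
      have hlabchain : ∀ q, pvChain (pvElig P) (i, j) q ↔ lab.get? q = some l0 := by
        intro q
        constructor
        · intro hch
          have heq := pvChain_right hch
          have h := (hEL (i, j) q helig heq).mpr hch
          rw [hl0] at h
          exact h.symm
        · intro hlq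
          have heq : pvElig P q := (hKL q).mp (by rw [hlq]; rfl)
          exact (hEL (i, j) q helig heq).mp (by rw [hl0, hlq])
      have hdisj2 : ∀ q, pvChain (pvElig P) (i, j) q → ¬ pvVp stA.1 q :=
        fun q hch hv => hnv (pvChain_into_closed hclosed (pvChain_symm hch) hv)
      have hmemc : (i, j) ∈ pvAllCells P := by
        rw [pvMem_allCells]
        refine ⟨hi0, by omega, hj0, by omega⟩
      have hflip : pvFreshA P (pvVSet stA.1 i j) + 1 = pvFreshA P stA.1 := by
        apply pvCountP_flip (pvNodup_allCells P) hmemc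
        · simp [hvg]
        · simp [pvVGet_pvVSet_self stA.1 hr1 hr2]
        · intro z hz hzne
          simp only [Bool.not_inj_iff]
          apply pvVGet_pvVSet_ne
          rw [pvMem_allCells] at hz hmemc
          by_contra hc
          push_neg at hc
          exact hzne (Prod.ext (by omega) (by omega))
      have hbfacts : ∀ z ∈ pvAllCells P,
          ((pvVGet (pvBfsA P (pvFreshA P (pvVSet stA.1 i j) + 1) (pvVSet stA.1 i j) [(i, j)] 0).1 z.1 z.2 = true)
            ↔ (pvVGet stA.1 z.1 z.2 = true ∨ (lab.get? z == some l0) = true))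
          ∧ ((lab.get? z == some l0) = true → pvVGet stA.1 z.1 z.2 = false) := by
        intro z hz
        rw [pvMem_allCells] at hz
        have hVA : pvVp stA.1 z ↔ pvVGet stA.1 z.1 z.2 = true :=
          ⟨fun h => h.2.2, fun h => ⟨hz.1, hz.2.2.1, h⟩⟩
        have hVF : pvVp (pvBfsA P (pvFreshA P (pvVSet stA.1 i j) + 1) (pvVSet stA.1 i j) [(i, j)] 0).1 z
            ↔ pvVGet (pvBfsA P (pvFreshA P (pvVSet stA.1 i j) + 1) (pvVSet stA.1 i j) [(i, j)] 0).1 z.1 z.2 = true :=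
          ⟨fun h => h.2.2, fun h => ⟨hz.1, hz.2.2.1, h⟩⟩
        have hbl : (lab.get? z == some l0) = true ↔ lab.get? z = some l0 := by
          simp
        constructor
        · rw [← hVA, ← hVF, hbl, ← hlabchain z]
          exact hVfinal z
        · intro h
          have hch := (hlabchain z).mpr (hbl.mp h)
          cases hbv : pvVGet stA.1 z.1 z.2 with
          | true => exact absurd (hVA.mpr hbv) (hdisj2 z hch)
          | false => rfl
      have hsplit : pvFreshA P stA.1
          = pvFreshA P (pvBfsA P (pvFreshA P (pvVSet stA.1 i j) + 1) (pvVSet stA.1 i j) [(i, j)] 0).1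
            + (pvAllCells P).countP (fun q => lab.get? q == some l0) := by
        unfold pvFreshA
        have h1 : (pvAllCells P).countP (fun p => !pvVGet stA.1 p.1 p.2)
            = (pvAllCells P).countP
                (fun p => (!pvVGet (pvBfsA P (pvFreshA P (pvVSet stA.1 i j) + 1) (pvVSet stA.1 i j) [(i, j)] 0).1 p.1 p.2)
                  || (lab.get? p == some l0)) := by
          apply List.countP_congr
          intro z hz
          obtain ⟨hiff, hd⟩ := hbfacts z hz
          cases hbL : (lab.get? z == some l0) with
          | true =>
            have hbv := hd hbL
            simp [hbv, hbL]
          | false =>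
            have : (pvVGet (pvBfsA P (pvFreshA P (pvVSet stA.1 i j) + 1) (pvVSet stA.1 i j) [(i, j)] 0).1 z.1 z.2 = true)
                ↔ (pvVGet stA.1 z.1 z.2 = true) := by
              rw [hiff, hbL]
              simp
            cases hbf : pvVGet (pvBfsA P (pvFreshA P (pvVSet stA.1 i j) + 1) (pvVSet stA.1 i j) [(i, j)] 0).1 z.1 z.2 with
            | true => simp [this.mp hbf, hbf, hbL]
            | false =>
              have hbv : pvVGet stA.1 z.1 z.2 = false := by
                cases hbv : pvVGet stA.1 z.1 z.2 with
                | true => rw [← this] at hbv; rw [hbv] at hbf; cases hbf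
                | false => rfl
              simp [hbv, hbf, hbL]
        rw [h1]
        apply pvCountP_disj_add
        rintro z hz ⟨hf, hl⟩
        obtain ⟨hiff, -⟩ := hbfacts z hz
        have : pvVGet (pvBfsA P (pvFreshA P (pvVSet stA.1 i j) + 1) (pvVSet stA.1 i j) [(i, j)] 0).1 z.1 z.2 = true :=
          hiff.mpr (Or.inr hl)
        rw [this] at hf
        cases hf
      have harea : (pvBfsA P (pvFreshA P (pvVSet stA.1 i j) + 1) (pvVSet stA.1 i j) [(i, j)] 0).2
          = (((pvAllCells P).countP (fun q => lab.get? q == some l0) : Nat) : Int) := by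
        simp only [List.length_singleton] at hareaF
        push_cast at hareaF ⊢
        omega
      have hcf : ¬ (PySem.Set.contains stB.2.2 l0 = true) :=
        fun h => hmem ((PySem.Set.contains_iff _ _).mp h)
      have hA : pvInnerA P i stA j
          = ((pvBfsA P (pvFreshA P (pvVSet stA.1 i j) + 1) (pvVSet stA.1 i j) [(i, j)] 0).1, stA.2.1 + 1,
              max (pvBfsA P (pvFreshA P (pvVSet stA.1 i j) + 1) (pvVSet stA.1 i j) [(i, j)] 0).2 stA.2.2) := by
        unfold pvInnerA
        rw [if_pos (by simp [hone, hvg])]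
      have hB : pvScanStep P lab sizes i stB j
          = (stB.1 + 1, max stB.2.1 (sizes.getD l0 0), PySem.Set.add stB.2.2 l0) := by
        unfold pvScanStep
        rw [if_pos (by simp [hone])]
        simp only [hgd]
        rw [if_neg hcf]
      rw [hA, hB]
      refine ⟨hshF, hinvF, ?_, by simp [hc1], ?_⟩
      · intro p
        constructor
        · intro hv
          rcases (hVfinal p).mp hv with hva | hch
          · obtain ⟨l, hl, hls⟩ := (hvis p).mp hva
            exact ⟨l, hl, (PySem.Set.mem_add _ _ _).mpr (Or.inl hls)⟩
          · exact ⟨l0, (hlabchain p).mp hch, (PySem.Set.mem_add _ _ _).mpr (Or.inr rfl)⟩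
        · rintro ⟨l, hl, hls⟩
          rcases (PySem.Set.mem_add _ _ _).mp hls with hls' | rfl
          · exact (hVfinal p).mpr (Or.inl ((hvis p).mpr ⟨l, hl, hls'⟩))
          · exact (hVfinal p).mpr (Or.inr ((hlabchain p).mpr hl))
      · show max (pvBfsA P (pvFreshA P (pvVSet stA.1 i j) + 1) (pvVSet stA.1 i j) [(i, j)] 0).2 stA.2.2
            = max stB.2.1 (sizes.getD l0 0)
        rw [harea, hc2, hsize l0]
        exact max_comm _ _
  · have hA : pvInnerA P i stA j = stA := by
      unfold pvInnerA
      rw [if_neg (by simp [hone])]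
    have hB : pvScanStep P lab sizes i stB j = stB := by
      unfold pvScanStep
      rw [if_neg (by simp [hone])]
    rw [hA, hB]
    exact hrel

-- ===== VERDICT (by name: the statement is the Claim_ definition above) =====
theorem solution_spec : Claim_equal_solution := by
  unfold Claim_equal_solution Spec_solution
  intro P n m hdom hpre
  rcases hpre with hpre | hn0 | hm0
  case inr.inl =>
    simp only [solution, solution_alt, PySem.List.pyRange_one_eq_nil (by omega : n ≤ 0),
      List.foldl_nil]
  case inr.inr =>
    simp only [solution, solution_alt, PySem.List.pyRange_one_eq_nil (by omega : m ≤ 0),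
      List.foldl_nil]
    simp only [pvFoldl_id]
  obtain ⟨hn, hrows⟩ := hpre
  obtain ⟨hndL, hKL, hEL⟩ := pvLabels_final P n m hn hrows
  have hwm0 : 0 < n → (pvWidth P : Int) = m := by
    intro hpos
    cases P with
    | nil => rw [hn] at hpos; simp at hpos
    | cons r t => exact hrows r List.mem_cons_self
  have hsize : ∀ l0 : Int, (PySem.Dict.counter (pvLabels P n m).values).getD l0 0
      = (((pvAllCells P).countP (fun q => (pvLabels P n m).get? q == some l0) : Nat) : Int) :=
    pvSizes_eq P (pvLabels P n m) hndL hKL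
  have hrel0 : pvRel2 P (pvLabels P n m)
      (List.replicate n.toNat (List.replicate m.toNat false), (0 : Int), (0 : Int))
      ((0 : Int), (0 : Int), (PySem.Set.empty : PySem.Set Int)) := by
    refine ⟨⟨?_, ?_⟩, ⟨fun p hp => hp.elim, fun c hc => absurd hc (pvVp_init _ _ c)⟩,
      ?_, rfl, rfl⟩
    · rw [List.length_replicate]
      omega
    · intro r hr
      rw [List.eq_of_mem_replicate hr, List.length_replicate]
      cases P with
      | nil =>
        exfalso
        have hz : n = 0 := by simpa using hn
        rw [hz] at hr
        simp at hr
      | cons r0 t =>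
        have h0 : (r0.length : Int) = m := hrows r0 List.mem_cons_self
        have hw : pvWidth (r0 :: t) = r0.length := rfl
        rw [hw]
        omega
    · intro p
      constructor
      · intro h
        exact absurd h (pvVp_init _ _ p)
      · rintro ⟨l, -, hls⟩
        exact absurd hls (List.not_mem_nil)
  have hfin := pvFoldl_rel (pvRel2 P (pvLabels P n m))
    (fun st i => (PySem.List.pyRange 0 m 1).foldl (pvInnerA P i) st)
    (fun st i => (PySem.List.pyRange 0 m 1).foldl
      (pvScanStep P (pvLabels P n m) (PySem.Dict.counter (pvLabels P n m).values) i) st)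
    (PySem.List.pyRange 0 n 1)
    (fun stA stB i hi hrel =>
      pvFoldl_rel (pvRel2 P (pvLabels P n m)) (pvInnerA P i)
        (pvScanStep P (pvLabels P n m) (PySem.Dict.counter (pvLabels P n m).values) i)
        (PySem.List.pyRange 0 m 1)
        (fun stA' stB' j hj hrel' =>
          pvScan_rel P n m (pvLabels P n m) (PySem.Dict.counter (pvLabels P n m).values)
            hn (hwm0 (by
              have := (PySem.List.mem_pyRange_one.mp hi).2
              have := (PySem.List.mem_pyRange_one.mp hi).1
              omega))
            hndL hKL hEL hsize i j
            (PySem.List.mem_pyRange_one.mp hi).1 (PySem.List.mem_pyRange_one.mp hi).2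
            (PySem.List.mem_pyRange_one.mp hj).1 (PySem.List.mem_pyRange_one.mp hj).2
            stA' stB' hrel')
        stA stB hrel)
    _ _ hrel0
  obtain ⟨-, -, -, hc1, hc2⟩ := hfin
  simp only [solution, solution_alt]
  exact Prod.ext hc1 hc2
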